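-- pv_equiv track=rewrite | github.com/argriffing/xgcode | Ftree.py | T_to_outside_in_edges
-- ===== SOURCE A (Python) =====
-- from collections import defaultdict
--
-- def T_to_v_to_centrality(T):
--     """
--     Get a certain kind of centrality for each vertex.
--     The particular kind of centerality for this function
--     is the number of times that you have to
--     strip off the terminal branches of the tree before
--     the vertex of interest has degree one.
--     So a leaf of the tree has zero centrality.
--     """
--     v_to_cent = {}
--     v_to_neighbors = T_to_v_to_neighbors(T)
--     cent = 0
--     # The shell is the set of leaves at the current centrality.
--     shell = set(T_to_leaves(T))
--     while shell:
--         # mark the centrality for the given shell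
--         for v in shell:
--             v_to_cent[v] = cent
--         cent += 1
--         # Get all vertices which are candidates for the next shell.
--         next_possible_shell = set()
--         for v in shell:
--             for adj in v_to_neighbors[v]:
--                 if adj not in v_to_cent:
--                     next_possible_shell.add(adj)
--         # Find the next shell vertices adjacent to at most
--         # a single vertex whose centrality is unknown.
--         shell = set()
--         for p in next_possible_shell:
--             nfree = sum(1 for a in v_to_neighbors[p] if a not in v_to_cent)
--             if nfree < 2:
--                 shell.add(p)
--     return v_to_cent
--
-- def T_to_outside_in_edges(T):
--     """
--     @param T: a topology
--     @return: an ordered list of directed edges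
--     """
--     edges = []
--     vertices = T_to_outside_in(T)
--     v_to_cent = T_to_v_to_centrality(T)
--     v_to_neighbors = T_to_v_to_neighbors(T)
--     for v in vertices[:-1]:
--         max_cent, best_adj = max((v_to_cent[x], x) for x in v_to_neighbors[v])
--         edges.append((v, best_adj))
--     return edges
--
-- def T_to_outside_in(T):
--     """
--     Get an ordered sequence of vertices.
--     This is according to a certain notion of centrality.
--     The leaves are guaranteed to be first.
--     @return: a list of ordered vertices
--     """
--     v_to_cent = T_to_v_to_centrality(T)
--     pairs = sorted((c, v) for v, c in v_to_cent.items())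
--     return [v for c, v in pairs]
--
-- def T_to_v_to_neighbors(T):
--     """
--     Get the map from a vertex to the set of its adjacent vertices.
--     @param T: topology
--     @return: a map from a vertex to the set of its adjacent vertices.
--     """
--     d = defaultdict(set)
--     for a, b in T:
--         d[a].add(b)
--         d[b].add(a)
--     return d
--
-- def T_to_v_to_degree(T):
--     """
--     Get the map from a vertex to the undirected unweighted vertex degree.
--     @param T: topology
--     @return: a map from a vertex to the size of its set of adjacent vertices
--     """
--     d = defaultdict(int)
--     for a, b in T:
--         d[a] += 1
--         d[b] += 1
--     return d
--
-- def T_to_leaves(T):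
--     """
--     @return: sorted degree one vertices
--     """
--     v_to_degree = T_to_v_to_degree(T)
--     return sorted(v for v, degree in v_to_degree.items() if degree == 1)
-- ===== SOURCE B (Python) =====
-- def T_to_outside_in_edges(T):
--     """
--     @param T: a topology
--     @return: an ordered list of directed edges
--     """
--     # One pass builds multiplicity degrees and neighbor sets.
--     deg = {}
--     nbr = {}
--     for a, b in T:
--         deg[a] = deg.get(a, 0) + 1
--         deg[b] = deg.get(b, 0) + 1
--         nbr.setdefault(a, set()).add(b)
--         nbr.setdefault(b, set()).add(a)
--     # Kahn-style peeling with decremented residual degrees: no centrality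
--     # map is ever built.  Each peeled vertex stamps itself on all its
--     # neighbors; since shells are processed outside-in and each shell in
--     # ascending order, the LAST stamp a vertex receives comes from its
--     # (centrality, name)-maximal neighbor, which is exactly its target.
--     rdeg = {v: len(s) for v, s in nbr.items()}
--     assigned = set()
--     order = []
--     target = {}
--     shell = sorted(v for v in deg if deg[v] == 1)
--     while shell:
--         assigned.update(shell)
--         order.extend(shell)
--         touched = set()
--         for v in shell:
--             for p in nbr[v]:
--                 target[p] = v
--                 rdeg[p] -= 1
--                 touched.add(p)
--         shell = sorted(p for p in touched if p not in assigned and rdeg[p] < 2)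
--     return [(v, target[v]) for v in order[:-1]]
-- ===== Notes on version B (the rewrite author's own statement) =====
-- stated objective: faster
-- what changed: A peels the graph twice (T_to_outside_in and T_to_v_to_centrality), builds the neighbor map three times, sorts all (centrality, vertex) pairs globally and picks each vertex's target with max() over its rebuilt neighbor-tuple list; B runs one Kahn-style peel with decremented residual degrees, never builds a centrality map at all, emits the vertex order shell by shell, and determines each vertex's target by stamping: every peeled vertex overwrites target[p] for all its neighbors p, so the last stamp a vertex receives comes exactly from its (centrality, name)-maximal neighbor.
-- outside the precondition, e.g. on T_to_outside_in_edges({(2, 3), (1, 2), (3, 1), (1, 4)}): A returns [], B returns []; on T_to_outside_in_edges({(1, 2), (3, 4), (3, 1), (2, 3), (4, 5)}): A returns [(5, 4)], B returns [(5, 4)]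
import Mathlib
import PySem

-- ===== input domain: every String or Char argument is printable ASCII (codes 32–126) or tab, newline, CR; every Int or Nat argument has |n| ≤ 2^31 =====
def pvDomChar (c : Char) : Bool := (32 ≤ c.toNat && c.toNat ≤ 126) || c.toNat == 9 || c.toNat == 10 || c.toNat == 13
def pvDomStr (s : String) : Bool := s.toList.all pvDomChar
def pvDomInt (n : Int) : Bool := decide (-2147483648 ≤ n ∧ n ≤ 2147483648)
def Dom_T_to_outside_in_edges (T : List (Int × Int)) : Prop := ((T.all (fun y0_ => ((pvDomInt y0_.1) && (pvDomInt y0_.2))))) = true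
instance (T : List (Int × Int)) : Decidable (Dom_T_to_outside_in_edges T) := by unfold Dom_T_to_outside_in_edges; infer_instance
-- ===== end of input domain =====

-- B replaces A's three peels (centrality twice, the neighbor map three times), global sort and per-vertex
-- max() by ONE Kahn-style peel with decremented residual degrees that never builds a centrality map:
-- each peeled vertex stamps itself on its neighbors, and the last stamp a vertex receives is its target.

-- ===== PORT A =====
def pvNbrs (T : List (Int × Int)) : PySem.Dict Int (PySem.Set Int) :=
  T.foldl (fun d p =>
      (d.modify p.1 PySem.Set.empty (fun s => PySem.Set.add s p.2)).modify p.2 PySem.Set.empty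
        (fun s => PySem.Set.add s p.1))
    PySem.Dict.empty

def pvDeg (T : List (Int × Int)) : PySem.Dict Int Int :=
  T.foldl (fun d p => (d.modify p.1 0 (· + 1)).modify p.2 0 (· + 1)) PySem.Dict.empty

def pvLeaves (T : List (Int × Int)) : List Int :=
  PySem.List.sorted (((pvDeg T).items.filter (fun q => q.2 == 1)).map (fun q => q.1)) (fun v => v) false

def pvCentLoop (nb : PySem.Dict Int (PySem.Set Int)) :
    Nat → PySem.Dict Int Int → Int → PySem.Set Int → PySem.Dict Int Int
  | 0, vc, _, _ => vc
  | fuel + 1, vc, cent, shell =>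
    if shell = [] then vc
    else
      let vc2 := shell.foldl (fun d v => d.insert v cent) vc
      let nps : PySem.Set Int :=
        shell.foldl (fun s v =>
            (nb.getD v PySem.Set.empty).foldl
              (fun s adj => if !vc2.contains adj then PySem.Set.add s adj else s) s)
          PySem.Set.empty
      let shell2 : PySem.Set Int :=
        nps.foldl (fun s p =>
            if (nb.getD p PySem.Set.empty).foldl
                 (fun n a => if !vc2.contains a then n + 1 else n) (0 : Int) < 2 then
              PySem.Set.add s p
            else s)
          PySem.Set.empty
      pvCentLoop nb fuel vc2 (cent + 1) shell2

-- the while loop runs at most one round per vertex (≤ 2·|T| vertices) plus the final empty-shell test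
def pvCent (T : List (Int × Int)) : PySem.Dict Int Int :=
  pvCentLoop (pvNbrs T) (2 * T.length + 1) PySem.Dict.empty 0 (PySem.Set.ofList (pvLeaves T))

def pvOutsideIn (T : List (Int × Int)) : List Int :=
  (PySem.List.sorted2 ((pvCent T).items.map (fun q => (q.2, q.1))) (fun r => r.1) (fun r => r.2)
      false).map (fun r => r.2)

def T_to_outside_in_edges (T : List (Int × Int)) : List (Int × Int) :=
  let vertices := pvOutsideIn T
  let vc := pvCent T
  let nb := pvNbrs T
  (PySem.List.slice vertices none (some (-1))).foldl
    (fun edges v =>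
      match PySem.List.max2? ((nb.getD v PySem.Set.empty).map (fun x => (vc.getD x 0, x)))
              (fun r => r.1) (fun r => r.2) with
      | some best => edges ++ [(v, best.2)]
      | none => edges)  -- max() on an empty sequence raises in Python; unreachable (every listed vertex has a neighbor)
    []

-- ===== PORT B =====
-- one pass over T builds the multiplicity degrees and the neighbor sets
def pvDegNbrAlt (T : List (Int × Int)) : PySem.Dict Int Int × PySem.Dict Int (PySem.Set Int) :=
  T.foldl (fun s p =>
      let deg := s.1.insert p.1 (s.1.getD p.1 0 + 1)
      let deg := deg.insert p.2 (deg.getD p.2 0 + 1)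
      let nbr := s.2.setdefault p.1 PySem.Set.empty
      let nbr := nbr.insert p.1 (PySem.Set.add (nbr.getD p.1 PySem.Set.empty) p.2)
      let nbr := nbr.setdefault p.2 PySem.Set.empty
      let nbr := nbr.insert p.2 (PySem.Set.add (nbr.getD p.2 PySem.Set.empty) p.1)
      (deg, nbr))
    (PySem.Dict.empty, PySem.Dict.empty)

-- the body of "for v in shell: for p in nbr[v]: target[p] = v; rdeg[p] -= 1; touched.add(p)";
-- the state is (target, rdeg, touched); rdeg[p] -= 1 is modify (KeyError unreachable: every
-- stamped p is an edge endpoint, hence an rdeg key)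
def pvStampB (nbr : PySem.Dict Int (PySem.Set Int))
    (st : PySem.Dict Int Int × PySem.Dict Int Int × PySem.Set Int) (v : Int) :
    PySem.Dict Int Int × PySem.Dict Int Int × PySem.Set Int :=
  (nbr.getD v PySem.Set.empty).foldl
    (fun st p => (st.1.insert p v, st.2.1.modify p 0 (fun n => n - 1), PySem.Set.add st.2.2 p)) st

def pvPeelB (nbr : PySem.Dict Int (PySem.Set Int)) :
    Nat → PySem.Set Int → List Int → PySem.Dict Int Int → PySem.Dict Int Int → List Int →
    List Int × PySem.Dict Int Int
  | 0, _, order, target, _, _ => (order, target)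
  | fuel + 1, asg, order, target, rdeg, shell =>
    if shell = [] then (order, target)
    else
      let asg2 := PySem.Set.update asg shell
      let order2 := order ++ shell
      let st := shell.foldl (pvStampB nbr) (target, rdeg, (PySem.Set.empty : PySem.Set Int))
      let shell2 := PySem.List.sorted
          (st.2.2.filter (fun p => !(PySem.Set.contains asg2 p) && decide (st.2.1.getD p 0 < 2)))
          (fun v => v) false
      pvPeelB nbr fuel asg2 order2 st.1 st.2.1 shell2

def T_to_outside_in_edges_alt (T : List (Int × Int)) : List (Int × Int) :=
  let dn := pvDegNbrAlt T
  let deg := dn.1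
  let nbr := dn.2
  let rdeg := nbr.items.foldl (fun d q => d.insert q.1 (PySem.Set.len q.2))
    PySem.Dict.empty
  let shell0 := PySem.List.sorted (deg.keys.filter (fun v => deg.getD v 0 == 1)) (fun v => v) false
  let ot := pvPeelB nbr (2 * T.length + 1) PySem.Set.empty [] PySem.Dict.empty rdeg shell0
  (PySem.List.slice ot.1 none (some (-1))).foldl
    (fun edges v =>
      match ot.2.get? v with  -- target[v]; KeyError unreachable inside Pre_
      | some t => edges ++ [(v, t)]
      | none => edges)
    []

-- ===== PRECONDITION & SPEC =====
-- the distinct endpoints, the multiplicity degree, and the number of edge-endpoints at v inside S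
def pvVertsOf (T : List (Int × Int)) : List Int :=
  PySem.Set.ofList (T.flatMap (fun p => [p.1, p.2]))

def pvMdeg (T : List (Int × Int)) (v : Int) : Nat :=
  (T.map (fun p => (if p.1 = v then 1 else 0) + (if p.2 = v then 1 else 0))).sum

def pvIncP (T : List (Int × Int)) (S : Int → Bool) (v : Int) : Nat :=
  (T.map (fun p => (if p.1 = v ∧ S p.2 = true then 1 else 0) +
                   (if p.2 = v ∧ S p.1 = true then 1 else 0))).sum

-- the 2-core: vertices contained in some subset in which every vertex has ≥ 2 incident edge-endpoints
def pvCore (T : List (Int × Int)) : Finset Int :=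
  (pvVertsOf T).toFinset.filter (fun v => ∃ S ∈ (pvVertsOf T).toFinset.powerset,
    v ∈ S ∧ ∀ u ∈ S, 2 ≤ pvIncP T (fun x => decide (x ∈ S)) u)

-- Pre_ admits leafless graphs (A peels nothing and returns []) and graphs whose 2-core touches no
-- peelable vertex (in particular every forest); it excludes graphs where an edge joins the cyclic
-- core to the peelable fringe: there A usually raises KeyError (a peeled vertex keeps a neighbor
-- that never gets a centrality), and on the cyclic graphs of this kind where A does return, B
-- happens to agree, but that region has no closed form.
def Pre_T_to_outside_in_edges (T : List (Int × Int)) : Prop :=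
  (∀ v ∈ pvVertsOf T, pvMdeg T v ≠ 1) ∨ (∀ p ∈ T, (p.1 ∈ pvCore T ↔ p.2 ∈ pvCore T))

instance (T : List (Int × Int)) : Decidable (Pre_T_to_outside_in_edges T) := by
  unfold Pre_T_to_outside_in_edges; infer_instance

def pvWitness_T_to_outside_in_edges : (List (Int × Int)) := [(0, 1), (1, 2)]

def Spec_T_to_outside_in_edges (T : List (Int × Int)) (out : List (Int × Int)) : Prop :=
  out = T_to_outside_in_edges_alt T
instance (T : List (Int × Int)) (out : List (Int × Int)) :
    Decidable (Spec_T_to_outside_in_edges T out) := by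
  unfold Spec_T_to_outside_in_edges; infer_instance

-- ===== CLAIM (what is proved, stated in full; the proofs are below) =====
def Claim_equal_T_to_outside_in_edges : Prop :=
  ∀ (T : List (Int × Int)), Dom_T_to_outside_in_edges T → Pre_T_to_outside_in_edges T →
    Spec_T_to_outside_in_edges T (T_to_outside_in_edges T)

-- ===== LEMMAS AND PROOFS =====

-- lexicographic strict order on value/vertex pairs (Python tuple comparison)
def pvLexLt (a b : Int × Int) : Prop := a.1 < b.1 ∨ (a.1 = b.1 ∧ a.2 < b.2)

theorem pv_pairwise_lt_of_le {l : List Int} (h : l.Pairwise (fun a b => a ≤ b)) (hn : l.Nodup) :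
    l.Pairwise (fun a b => a < b) := by
  induction l with
  | nil => exact List.Pairwise.nil
  | cons a t ih =>
    rcases List.pairwise_cons.mp h with ⟨h1, h2⟩
    rcases List.nodup_cons.mp hn with ⟨hna, hnt⟩
    refine List.pairwise_cons.mpr ⟨fun b hb => ?_, ih h2 hnt⟩
    rcases lt_or_eq_of_le (h1 b hb) with h | h
    · exact h
    · exact absurd (h ▸ hb) hna

theorem pv_mem_foldl_add_if (p : Int → Prop) [DecidablePred p] (l : List Int) :
    ∀ (s : PySem.Set Int) (y : Int),
      (y ∈ l.foldl (fun s x => if p x then PySem.Set.add s x else s) s) ↔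
        y ∈ s ∨ (y ∈ l ∧ p y) := by
  induction l with
  | nil => simp
  | cons a t ih =>
    intro s y
    simp only [List.foldl_cons]
    by_cases hp : p a
    · rw [if_pos hp, ih, PySem.Set.mem_add]
      constructor
      · rintro (⟨h | rfl⟩ | ⟨h1, h2⟩)
        · exact Or.inl h
        · exact Or.inr ⟨List.mem_cons_self, hp⟩
        · exact Or.inr ⟨List.mem_cons_of_mem _ h1, h2⟩
      · rintro (h | ⟨h1, h2⟩)
        · exact Or.inl (Or.inl h)
        · rcases List.mem_cons.mp h1 with rfl | h1
          · exact Or.inl (Or.inr rfl)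
          · exact Or.inr ⟨h1, h2⟩
    · rw [if_neg hp, ih]
      constructor
      · rintro (h | ⟨h1, h2⟩)
        · exact Or.inl h
        · exact Or.inr ⟨List.mem_cons_of_mem _ h1, h2⟩
      · rintro (h | ⟨h1, h2⟩)
        · exact Or.inl h
        · rcases List.mem_cons.mp h1 with rfl | h1
          · exact absurd h2 hp
          · exact Or.inr ⟨h1, h2⟩

theorem pv_nodup_foldl_add_if (p : Int → Prop) [DecidablePred p] (l : List Int) :
    ∀ (s : PySem.Set Int), s.Nodup →
      (l.foldl (fun s x => if p x then PySem.Set.add s x else s) s).Nodup := by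
  induction l with
  | nil => intro s hs; simpa using hs
  | cons a t ih =>
    intro s hs
    simp only [List.foldl_cons]
    by_cases hp : p a
    · rw [if_pos hp]; exact ih _ (PySem.Set.nodup_add s a hs)
    · rw [if_neg hp]; exact ih _ hs

theorem pv_get?_foldl_insert_const (S : List Int) (c : Int) :
    ∀ (d : PySem.Dict Int Int) (k : Int),
      (S.foldl (fun d v => d.insert v c) d).get? k = if k ∈ S then some c else d.get? k := by
  induction S with
  | nil => simp
  | cons a t ih =>
    intro d k
    simp only [List.foldl_cons]
    rw [ih]
    by_cases hk : k ∈ t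
    · rw [if_pos hk, if_pos (List.mem_cons_of_mem _ hk)]
    · rw [if_neg hk, PySem.Dict.get?_insert]
      by_cases hka : k = a
      · rw [if_pos hka, if_pos (by simp [hka])]
      · rw [if_neg hka, if_neg (by simp [hka, hk])]

theorem pv_get?_eq_ite (d : PySem.Dict Int Int) (k : Int) (d0 : Int) :
    d.get? k = if d.contains k = true then some (d.getD k d0) else none := by
  rw [PySem.Dict.contains_eq_isSome_get?, PySem.Dict.getD_eq_get?_getD]
  cases h : d.get? k <;> simp

def pvStepDegA (d : PySem.Dict Int Int) (p : Int × Int) : PySem.Dict Int Int :=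
  (d.modify p.1 0 (· + 1)).modify p.2 0 (· + 1)

def pvStepNbrA (n : PySem.Dict Int (PySem.Set Int)) (p : Int × Int) : PySem.Dict Int (PySem.Set Int) :=
  (n.modify p.1 PySem.Set.empty (fun s => PySem.Set.add s p.2)).modify p.2 PySem.Set.empty
    (fun s => PySem.Set.add s p.1)

def pvStepDegB (d : PySem.Dict Int Int) (p : Int × Int) : PySem.Dict Int Int :=
  let deg := d.insert p.1 (d.getD p.1 0 + 1)
  deg.insert p.2 (deg.getD p.2 0 + 1)

def pvStepNbrB (n : PySem.Dict Int (PySem.Set Int)) (p : Int × Int) : PySem.Dict Int (PySem.Set Int) :=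
  let nbr := n.setdefault p.1 PySem.Set.empty
  let nbr := nbr.insert p.1 (PySem.Set.add (nbr.getD p.1 PySem.Set.empty) p.2)
  let nbr := nbr.setdefault p.2 PySem.Set.empty
  nbr.insert p.2 (PySem.Set.add (nbr.getD p.2 PySem.Set.empty) p.1)

theorem pv_split (T : List (Int × Int)) :
    pvDegNbrAlt T = (T.foldl pvStepDegB PySem.Dict.empty, T.foldl pvStepNbrB PySem.Dict.empty) := by
  suffices h : ∀ (a : PySem.Dict Int Int) (b : PySem.Dict Int (PySem.Set Int)),
      T.foldl (fun s p =>
        let deg := s.1.insert p.1 (s.1.getD p.1 0 + 1)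
        let deg := deg.insert p.2 (deg.getD p.2 0 + 1)
        let nbr := s.2.setdefault p.1 PySem.Set.empty
        let nbr := nbr.insert p.1 (PySem.Set.add (nbr.getD p.1 PySem.Set.empty) p.2)
        let nbr := nbr.setdefault p.2 PySem.Set.empty
        let nbr := nbr.insert p.2 (PySem.Set.add (nbr.getD p.2 PySem.Set.empty) p.1)
        (deg, nbr)) (a, b) = (T.foldl pvStepDegB a, T.foldl pvStepNbrB b) by
    exact h _ _
  induction T with
  | nil => intro a b; rfl
  | cons p t ih => intro a b; simpa using ih (pvStepDegB a p) (pvStepNbrB b p)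

theorem pv_stepDeg_rel (d d' : PySem.Dict Int Int) (p : Int × Int)
    (ih : ∀ k, d.contains k = d'.contains k ∧ d.getD k 0 = d'.getD k 0) :
    ∀ k, (pvStepDegA d p).contains k = (pvStepDegB d' p).contains k ∧
      (pvStepDegA d p).getD k 0 = (pvStepDegB d' p).getD k 0 := by
  intro k
  unfold pvStepDegA pvStepDegB
  constructor
  · simp only [PySem.Dict.contains_modify, PySem.Dict.contains_insert, (ih k).1]
  · simp only [PySem.Dict.getD_modify, PySem.Dict.getD_insert]
    by_cases h2 : k = p.2
    · simp only [if_pos h2]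
      by_cases h1 : p.2 = p.1
      · simp [h1, (ih p.1).2]
      · simp [h1, (ih p.2).2]
    · simp only [if_neg h2]
      by_cases h1 : k = p.1
      · simp [h1, (ih p.1).2]
      · simp [h1, (ih k).2]

theorem pv_deg_rel (T : List (Int × Int)) :
    ∀ k, (pvDeg T).contains k = ((pvDegNbrAlt T).1).contains k ∧
      (pvDeg T).getD k 0 = ((pvDegNbrAlt T).1).getD k 0 := by
  rw [pv_split]
  show ∀ k, (T.foldl pvStepDegA PySem.Dict.empty).contains k = _ ∧ _
  suffices h : ∀ (d d' : PySem.Dict Int Int),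
      (∀ k, d.contains k = d'.contains k ∧ d.getD k 0 = d'.getD k 0) →
      ∀ k, (T.foldl pvStepDegA d).contains k = (T.foldl pvStepDegB d').contains k ∧
        (T.foldl pvStepDegA d).getD k 0 = (T.foldl pvStepDegB d').getD k 0 by
    exact h _ _ (fun k => ⟨rfl, rfl⟩)
  induction T with
  | nil => intro d d' h; exact h
  | cons p t ih => intro d d' h; exact ih _ _ (pv_stepDeg_rel d d' p h)

theorem pv_getD_setins (n : PySem.Dict Int (PySem.Set Int)) (a b v : Int) :
    ((n.setdefault a PySem.Set.empty).insert a
        (PySem.Set.add ((n.setdefault a PySem.Set.empty).getD a PySem.Set.empty) b)).getD v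
        PySem.Set.empty =
      if v = a then PySem.Set.add (n.getD a PySem.Set.empty) b else n.getD v PySem.Set.empty := by
  rw [PySem.Dict.getD_insert]
  by_cases h : v = a
  · simp [h, PySem.Dict.getD_setdefault_self]
  · rw [if_neg h, if_neg h, PySem.Dict.getD_eq_get?_getD, PySem.Dict.get?_setdefault_of_ne _ _ h,
      PySem.Dict.getD_eq_get?_getD]

theorem pv_getD_modadd (n : PySem.Dict Int (PySem.Set Int)) (a b v : Int) :
    (n.modify a PySem.Set.empty (fun s => PySem.Set.add s b)).getD v PySem.Set.empty =
      if v = a then PySem.Set.add (n.getD a PySem.Set.empty) b else n.getD v PySem.Set.empty := by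
  rw [PySem.Dict.getD_modify]

def pvModAdd (n : PySem.Dict Int (PySem.Set Int)) (a b : Int) : PySem.Dict Int (PySem.Set Int) :=
  n.modify a PySem.Set.empty (fun s => PySem.Set.add s b)

def pvSetIns (n : PySem.Dict Int (PySem.Set Int)) (a b : Int) : PySem.Dict Int (PySem.Set Int) :=
  (n.setdefault a PySem.Set.empty).insert a
    (PySem.Set.add ((n.setdefault a PySem.Set.empty).getD a PySem.Set.empty) b)

def pvNRel (n n' : PySem.Dict Int (PySem.Set Int)) : Prop :=
  ∀ v, ((n.getD v PySem.Set.empty).Nodup ∧ (n'.getD v PySem.Set.empty).Nodup) ∧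
    (∀ x, x ∈ n.getD v PySem.Set.empty ↔ x ∈ n'.getD v PySem.Set.empty)

theorem pv_half_rel {n n' : PySem.Dict Int (PySem.Set Int)} (a b : Int)
    (ih : pvNRel n n') : pvNRel (pvModAdd n a b) (pvSetIns n' a b) := by
  intro v
  unfold pvModAdd pvSetIns
  rw [pv_getD_modadd, pv_getD_setins]
  by_cases h : v = a
  · rw [if_pos h, if_pos h]
    refine ⟨⟨PySem.Set.nodup_add _ _ ((ih a).1).1, PySem.Set.nodup_add _ _ ((ih a).1).2⟩, ?_⟩
    intro x
    rw [PySem.Set.mem_add, PySem.Set.mem_add, (ih a).2 x]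
  · rw [if_neg h, if_neg h]
    exact ih v

theorem pv_stepNbr_rel {n n' : PySem.Dict Int (PySem.Set Int)} (p : Int × Int)
    (ih : pvNRel n n') : pvNRel (pvStepNbrA n p) (pvStepNbrB n' p) := by
  have h1 : pvStepNbrA n p = pvModAdd (pvModAdd n p.1 p.2) p.2 p.1 := rfl
  have h2 : pvStepNbrB n' p = pvSetIns (pvSetIns n' p.1 p.2) p.2 p.1 := rfl
  rw [h1, h2]
  exact pv_half_rel _ _ (pv_half_rel _ _ ih)

theorem pv_nbr_rel (T : List (Int × Int)) : pvNRel (pvNbrs T) (pvDegNbrAlt T).2 := by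
  rw [pv_split]
  show pvNRel (T.foldl pvStepNbrA PySem.Dict.empty) _
  suffices h : ∀ (n n' : PySem.Dict Int (PySem.Set Int)), pvNRel n n' →
      pvNRel (T.foldl pvStepNbrA n) (T.foldl pvStepNbrB n') by
    refine h _ _ (fun v => ⟨⟨?_, ?_⟩, fun x => ?_⟩) <;>
      simp [PySem.Dict.getD_empty, PySem.Set.empty]
  induction T with
  | nil => intro n n' h; exact h
  | cons p t iht => intro n n' h; exact iht _ _ (pv_stepNbr_rel p h)

theorem pv_nodup_keys_modify (d : PySem.Dict Int Int) (k : Int) (d0 : Int) (f : Int → Int)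
    (h : d.keys.Nodup) : (d.modify k d0 f).keys.Nodup := by
  rw [PySem.Dict.keys_modify]
  exact PySem.Dict.nodup_keys_insert _ _ _ h

theorem pv_nodup_keys_degA (T : List (Int × Int)) : (pvDeg T).keys.Nodup := by
  show (T.foldl pvStepDegA PySem.Dict.empty).keys.Nodup
  suffices h : ∀ d : PySem.Dict Int Int, d.keys.Nodup → (T.foldl pvStepDegA d).keys.Nodup by
    exact h _ PySem.Dict.nodup_keys_empty
  induction T with
  | nil => intro d h; exact h
  | cons p t ih =>
    intro d h
    exact ih _ (pv_nodup_keys_modify _ _ _ _ (pv_nodup_keys_modify _ _ _ _ h))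

theorem pv_nodup_keys_degB (T : List (Int × Int)) : ((pvDegNbrAlt T).1).keys.Nodup := by
  rw [pv_split]
  suffices h : ∀ d : PySem.Dict Int Int, d.keys.Nodup → (T.foldl pvStepDegB d).keys.Nodup by
    exact h _ PySem.Dict.nodup_keys_empty
  induction T with
  | nil => intro d h; exact h
  | cons p t ih =>
    intro d h
    exact ih _ (PySem.Dict.nodup_keys_insert _ _ _ (PySem.Dict.nodup_keys_insert _ _ _ h))

theorem pv_contains_getD_one (d : PySem.Dict Int Int) (hnd : d.keys.Nodup) (y : Int) :
    (y ∈ (d.items.filter (fun q => q.2 == 1)).map (fun q => q.1)) ↔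
      (d.contains y = true ∧ d.getD y 0 = 1) := by
  constructor
  · rintro hy
    rcases List.mem_map.mp hy with ⟨q, hq, rfl⟩
    rcases List.mem_filter.mp hq with ⟨hq1, hq2⟩
    have hget : d.get? q.1 = some q.2 := PySem.Dict.get?_of_mem_items _ (by exact hq1) hnd
    constructor
    · rw [PySem.Dict.contains_eq_isSome_get?, hget]; rfl
    · rw [PySem.Dict.getD_eq_get?_getD, hget]
      simpa using hq2
  · rintro ⟨hc, hg⟩
    have hget : d.get? y = some 1 := by
      rw [pv_get?_eq_ite d y 0, if_pos hc, hg]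
    have : (y, (1 : Int)) ∈ d.items := PySem.Dict.mem_items_of_get?_eq_some d hget
    exact List.mem_map.mpr ⟨(y, 1), List.mem_filter.mpr ⟨this, by simp⟩, rfl⟩

theorem pv_leaves_eq (T : List (Int × Int)) :
    pvLeaves T =
      PySem.List.sorted
        (((pvDegNbrAlt T).1).keys.filter (fun v => ((pvDegNbrAlt T).1).getD v 0 == 1))
        (fun v => v) false := by
  unfold pvLeaves
  refine PySem.List.sorted_eq_sorted_of_perm _ _ _ (fun a b h => h) ?_
  have hndA : (((pvDeg T).items.filter (fun q => q.2 == 1)).map (fun q => q.1)).Nodup := by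
    have : (((pvDeg T).items.filter (fun q => q.2 == 1)).map (fun q => q.1)).Sublist
        ((pvDeg T).items.map (fun q => q.1)) := List.Sublist.map _ List.filter_sublist
    exact (pv_nodup_keys_degA T).sublist this
  have hndB : (((pvDegNbrAlt T).1).keys.filter
      (fun v => ((pvDegNbrAlt T).1).getD v 0 == 1)).Nodup :=
    (pv_nodup_keys_degB T).filter _
  refine (List.perm_ext_iff_of_nodup hndA hndB).mpr (fun y => ?_)
  rw [pv_contains_getD_one _ (pv_nodup_keys_degA T) y, List.mem_filter]
  rw [← PySem.Dict.contains_iff_mem_keys]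
  rcases pv_deg_rel T y with ⟨h1, h2⟩
  rw [h1, h2]
  simp

theorem pv_foldl_insertBy_congr (xs : List (Int × Int)) (f g : Int × Int → Int × Int → Bool)
    (h : f = g) :
    xs.foldl (fun acc x => PySem.List.insertBy f x acc) [] =
      xs.foldl (fun acc x => PySem.List.insertBy g x acc) [] := by rw [h]

theorem pv_sorted2_eq_sorted_lex (xs : List (Int × Int)) :
    PySem.List.sorted2 xs (fun r => r.1) (fun r => r.2) false =
      PySem.List.sorted xs (fun r => (toLex r : Lex (Int × Int))) false := by
  unfold PySem.List.sorted2 PySem.List.sorted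
  simp only [Bool.false_eq_true, if_false]
  refine pv_foldl_insertBy_congr xs _ _ ?_
  funext a b
  rw [Bool.eq_iff_iff]
  simp only [Bool.or_eq_true, Bool.and_eq_true, Bool.not_eq_true', decide_eq_true_eq,
    decide_eq_false_iff_not, Prod.Lex.toLex_lt_toLex]
  omega

theorem pv_sorted2_eq_of_perm_of_pairwise (xs ys : List (Int × Int)) (hp : ys.Perm xs)
    (hw : ys.Pairwise pvLexLt) :
    PySem.List.sorted2 xs (fun r => r.1) (fun r => r.2) false = ys := by
  rw [pv_sorted2_eq_sorted_lex]
  refine PySem.List.sorted_eq_of_perm_of_pairwise_lt xs ys _ hp ?_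
  exact hw.imp (fun h => Prod.Lex.toLex_lt_toLex.mpr h)

theorem pv_contains_foldl_insert_const (S : List Int) (c : Int) (d : PySem.Dict Int Int) (k : Int) :
    (S.foldl (fun d v => d.insert v c) d).contains k =
      (decide (k ∈ S) || d.contains k) := by
  rw [PySem.Dict.contains_eq_isSome_get?, pv_get?_foldl_insert_const,
    PySem.Dict.contains_eq_isSome_get?]
  by_cases h : k ∈ S
  · simp [h]
  · simp [h]

theorem pv_mem_npsA (nb : PySem.Dict Int (PySem.Set Int)) (vc : PySem.Dict Int Int)
    (shell : List Int) :
    ∀ (s : PySem.Set Int) (y : Int),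
      (y ∈ shell.foldl (fun s v =>
          (nb.getD v PySem.Set.empty).foldl
            (fun s adj => if !vc.contains adj then PySem.Set.add s adj else s) s) s) ↔
        y ∈ s ∨ ∃ v ∈ shell, y ∈ nb.getD v PySem.Set.empty ∧ vc.contains y = false := by
  induction shell with
  | nil => simp
  | cons a t ih =>
    intro s y
    simp only [List.foldl_cons]
    rw [ih]
    rw [pv_mem_foldl_add_if (fun x => (!vc.contains x) = true)]
    simp only [Bool.not_eq_true']
    constructor
    · rintro ((h | ⟨h1, h2⟩) | ⟨v, hv, h1, h2⟩)
      · exact Or.inl h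
      · exact Or.inr ⟨a, List.mem_cons_self, h1, h2⟩
      · exact Or.inr ⟨v, List.mem_cons_of_mem _ hv, h1, h2⟩
    · rintro (h | ⟨v, hv, h1, h2⟩)
      · exact Or.inl (Or.inl h)
      · rcases List.mem_cons.mp hv with rfl | hv
        · exact Or.inl (Or.inr ⟨h1, h2⟩)
        · exact Or.inr ⟨v, hv, h1, h2⟩

theorem pv_scan_spec {α : Type} (key : α → Int × Int)
    (step : Option (Int × Int) → α → Option (Int × Int))
    (hnone : ∀ x, step none x = some (key x))
    (hsome1 : ∀ b x, pvLexLt b (key x) → step (some b) x = some (key x))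
    (hsome2 : ∀ b x, ¬ pvLexLt b (key x) → step (some b) x = some b) :
    ∀ (l : List α) (acc m), l.foldl step acc = some m →
      (acc = some m ∨ m ∈ l.map key) ∧ (∀ y ∈ l.map key, ¬ pvLexLt m y) ∧
        (∀ b, acc = some b → ¬ pvLexLt m b) := by
  intro l
  induction l with
  | nil =>
    intro acc m h
    simp only [List.foldl_nil] at h
    refine ⟨Or.inl h, by simp, ?_⟩
    rintro b rfl
    obtain rfl : m = b := by simpa using h.symm
    unfold pvLexLt; omega
  | cons a t ih =>
    intro acc m h
    simp only [List.foldl_cons] at h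
    obtain ⟨hm, hmax, hacc⟩ := ih (step acc a) m h
    have hnlta : ¬ pvLexLt m (key a) := by
      cases acc with
      | none => exact hacc (key a) (hnone a)
      | some b0 =>
        by_cases hba : pvLexLt b0 (key a)
        · exact hacc (key a) (hsome1 b0 a hba)
        · have hmb0 : ¬ pvLexLt m b0 := hacc b0 (hsome2 b0 a hba)
          unfold pvLexLt at *
          omega
    refine ⟨?_, ?_, ?_⟩
    · rcases hm with hm | hm
      · cases acc with
        | none =>
          rw [hnone a] at hm
          refine Or.inr ?_
          simp only [List.map_cons, List.mem_cons]
          exact Or.inl (Option.some_inj.mp hm).symm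
        | some b0 =>
          by_cases hba : pvLexLt b0 (key a)
          · rw [hsome1 b0 a hba] at hm
            refine Or.inr ?_
            simp only [List.map_cons, List.mem_cons]
            exact Or.inl (Option.some_inj.mp hm).symm
          · rw [hsome2 b0 a hba] at hm
            exact Or.inl (by rw [Option.some_inj.mp hm])
      · refine Or.inr ?_
        simp only [List.map_cons, List.mem_cons]
        exact Or.inr hm
    · intro y hy
      rcases List.mem_cons.mp hy with rfl | hy
      · exact hnlta
      · exact hmax y hy
    · rintro b rfl
      by_cases hba : pvLexLt b (key a)
      · unfold pvLexLt at *; omega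
      · exact hacc b (hsome2 b a hba)

theorem pv_scan_isSome {α : Type} (step : Option (Int × Int) → α → Option (Int × Int))
    (hstep : ∀ acc x, ∃ r, step acc x = some r) :
    ∀ (l : List α) (b : Int × Int), ∃ m, l.foldl step (some b) = some m := by
  intro l
  induction l with
  | nil => intro b; exact ⟨b, rfl⟩
  | cons a t ih =>
    intro b
    simp only [List.foldl_cons]
    obtain ⟨r, hr⟩ := hstep (some b) a
    rw [hr]
    exact ih r

theorem pv_scan_eq (la' : List (Int × Int)) (lb : List Int) (key : Int → Int × Int)
    (stepA : Option (Int × Int) → Int × Int → Option (Int × Int))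
    (stepB : Option (Int × Int) → Int → Option (Int × Int))
    (hAn : ∀ x, stepA none x = some x)
    (hA1 : ∀ b x, pvLexLt b x → stepA (some b) x = some x)
    (hA2 : ∀ b x, ¬ pvLexLt b x → stepA (some b) x = some b)
    (hBn : ∀ u, stepB none u = some (key u))
    (hB1 : ∀ b u, pvLexLt b (key u) → stepB (some b) u = some (key u))
    (hB2 : ∀ b u, ¬ pvLexLt b (key u) → stepB (some b) u = some b)
    (hmm : ∀ y, y ∈ la' ↔ y ∈ lb.map key) :
    la'.foldl stepA none = lb.foldl stepB none := by
  cases hla : la' with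
  | nil =>
    have hlb : lb.map key = [] := by
      rw [List.eq_nil_iff_forall_not_mem]
      intro y hy
      rw [hla] at hmm
      exact (List.not_mem_nil (a := y)) ((hmm y).mpr hy)
    cases lb with
    | nil => rfl
    | cons b tb => simp at hlb
  | cons a ta =>
    cases lb with
    | nil =>
      exfalso
      have := (hmm a).mp (by rw [hla]; exact List.mem_cons_self)
      simp at this
    | cons b tb =>
      simp only [List.foldl_cons]
      rw [hAn a, hBn b]
      obtain ⟨m1, hm1⟩ := pv_scan_isSome stepA
        (fun acc x => by
          cases acc with
          | none => exact ⟨x, hAn x⟩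
          | some c =>
            by_cases h : pvLexLt c x
            · exact ⟨x, hA1 c x h⟩
            · exact ⟨c, hA2 c x h⟩) ta a
      obtain ⟨m2, hm2⟩ := pv_scan_isSome stepB
        (fun acc u => by
          cases acc with
          | none => exact ⟨key u, hBn u⟩
          | some c =>
            by_cases h : pvLexLt c (key u)
            · exact ⟨key u, hB1 c u h⟩
            · exact ⟨c, hB2 c u h⟩) tb (key b)
      rw [hm1, hm2]
      obtain ⟨hmem1, hmax1, hacc1⟩ :=
        pv_scan_spec (fun (y : Int × Int) => y) stepA hAn hA1 hA2 ta (some a) m1 hm1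
      obtain ⟨hmem2, hmax2, hacc2⟩ :=
        pv_scan_spec key stepB hBn hB1 hB2 tb (some (key b)) m2 hm2
      have hm1mem : m1 ∈ la' := by
        rw [hla]
        rcases hmem1 with h | h
        · exact (Option.some_inj.mp h) ▸ List.mem_cons_self
        · exact List.mem_cons_of_mem _ (by simpa using h)
      have hm2mem' : m2 ∈ (b :: tb).map key := by
        rcases hmem2 with h | h
        · simp only [List.map_cons, List.mem_cons]
          exact Or.inl (Option.some_inj.mp h).symm
        · simp only [List.map_cons, List.mem_cons]
          exact Or.inr h
      have hmax1' : ∀ y ∈ la', ¬ pvLexLt m1 y := by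
        intro y hy
        rw [hla] at hy
        rcases List.mem_cons.mp hy with rfl | hy
        · exact hacc1 _ rfl
        · exact hmax1 y (by simpa using hy)
      have hmax2' : ∀ y ∈ (b :: tb).map key, ¬ pvLexLt m2 y := by
        intro y hy
        rcases (by simpa using hy : y = key b ∨ y ∈ tb.map key) with rfl | hy
        · exact hacc2 _ rfl
        · exact hmax2 y hy
      have h12 : ¬ pvLexLt m1 m2 := hmax1' m2 ((hmm m2).mpr hm2mem')
      have h21 : ¬ pvLexLt m2 m1 := hmax2' m1 ((hmm m1).mp hm1mem)
      congr 1
      unfold pvLexLt at h12 h21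
      obtain ⟨u1, v1⟩ := m1
      obtain ⟨u2, v2⟩ := m2
      simp only [not_or, not_and, not_lt] at h12 h21
      have h : u1 = u2 ∧ v1 = v2 := by omega
      rw [h.1, h.2]

theorem pv_nodup_LA (T : List (Int × Int)) :
    (((pvDeg T).items.filter (fun q => q.2 == 1)).map (fun q => q.1)).Nodup := by
  have h : (((pvDeg T).items.filter (fun q => q.2 == 1)).map (fun q => q.1)).Sublist
      ((pvDeg T).items.map (fun q => q.1)) := List.Sublist.map _ List.filter_sublist
  exact (pv_nodup_keys_degA T).sublist h

theorem pv_nodup_leaves (T : List (Int × Int)) : (pvLeaves T).Nodup :=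
  (PySem.List.sorted_perm _ _ _).nodup_iff.mpr (pv_nodup_LA T)


-- ===== graph characterizations (adjacency, vertex set, degrees, incidence counts) =====

def pvAdj (T : List (Int × Int)) (v x : Int) : Bool :=
  T.any (fun p => (p.1 == v && p.2 == x) || (p.2 == v && p.1 == x))

theorem pv_mem_modAdd (n : PySem.Dict Int (PySem.Set Int)) (a b v x : Int) :
    x ∈ (pvModAdd n a b).getD v PySem.Set.empty ↔
      x ∈ n.getD v PySem.Set.empty ∨ (v = a ∧ x = b) := by
  unfold pvModAdd
  rw [pv_getD_modadd]
  by_cases h : v = a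
  · subst h
    rw [if_pos rfl, PySem.Set.mem_add]
    tauto
  · rw [if_neg h]
    tauto

theorem pv_mem_stepNbrA (d : PySem.Dict Int (PySem.Set Int)) (p : Int × Int) (v x : Int) :
    x ∈ (pvStepNbrA d p).getD v PySem.Set.empty ↔
      x ∈ d.getD v PySem.Set.empty ∨ (p.1 = v ∧ p.2 = x) ∨ (p.2 = v ∧ p.1 = x) := by
  have h : pvStepNbrA d p = pvModAdd (pvModAdd d p.1 p.2) p.2 p.1 := rfl
  rw [h, pv_mem_modAdd, pv_mem_modAdd]
  constructor
  · rintro ((h | ⟨h1, h2⟩) | ⟨h1, h2⟩)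
    · exact Or.inl h
    · exact Or.inr (Or.inl ⟨h1.symm, h2.symm⟩)
    · exact Or.inr (Or.inr ⟨h1.symm, h2.symm⟩)
  · rintro (h | ⟨h1, h2⟩ | ⟨h1, h2⟩)
    · exact Or.inl (Or.inl h)
    · exact Or.inl (Or.inr ⟨h1.symm, h2.symm⟩)
    · exact Or.inr ⟨h1.symm, h2.symm⟩

theorem pv_adj_cons (p : Int × Int) (t : List (Int × Int)) (v x : Int) :
    pvAdj (p :: t) v x = true ↔
      ((p.1 = v ∧ p.2 = x) ∨ (p.2 = v ∧ p.1 = x)) ∨ pvAdj t v x = true := by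
  unfold pvAdj
  simp [List.any_cons]

theorem pv_mem_nbrs (T : List (Int × Int)) (v x : Int) :
    x ∈ (pvNbrs T).getD v PySem.Set.empty ↔ pvAdj T v x = true := by
  suffices h : ∀ d : PySem.Dict Int (PySem.Set Int),
      x ∈ (T.foldl pvStepNbrA d).getD v PySem.Set.empty ↔
        x ∈ d.getD v PySem.Set.empty ∨ pvAdj T v x = true by
    have := h PySem.Dict.empty
    show x ∈ (T.foldl pvStepNbrA PySem.Dict.empty).getD v PySem.Set.empty ↔ _
    rw [this]
    simp [PySem.Dict.getD_empty, PySem.Set.empty]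
  induction T with
  | nil => intro d; simp [pvAdj]
  | cons p t ih =>
    intro d
    simp only [List.foldl_cons]
    rw [ih, pv_mem_stepNbrA, pv_adj_cons]
    tauto

theorem pv_nbrs_symm (T : List (Int × Int)) (v x : Int) :
    x ∈ (pvNbrs T).getD v PySem.Set.empty ↔ v ∈ (pvNbrs T).getD x PySem.Set.empty := by
  rw [pv_mem_nbrs, pv_mem_nbrs]
  unfold pvAdj
  simp only [List.any_eq_true, Bool.or_eq_true, Bool.and_eq_true, beq_iff_eq]
  constructor <;> (rintro ⟨p, hp, h⟩; exact ⟨p, hp, by tauto⟩)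

theorem pv_mem_verts (T : List (Int × Int)) (v : Int) :
    v ∈ pvVertsOf T ↔ (T.any (fun p => p.1 == v || p.2 == v)) = true := by
  unfold pvVertsOf
  rw [PySem.Set.mem_ofList]
  simp only [List.mem_flatMap, List.any_eq_true, Bool.or_eq_true, beq_iff_eq,
    List.mem_cons, List.not_mem_nil, or_false]
  constructor <;> (rintro ⟨p, hp, h⟩; exact ⟨p, hp, by tauto⟩)

theorem pv_nbrs_sub_verts (T : List (Int × Int)) (v x : Int)
    (h : x ∈ (pvNbrs T).getD v PySem.Set.empty) : x ∈ pvVertsOf T ∧ v ∈ pvVertsOf T := by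
  rw [pv_mem_nbrs] at h
  unfold pvAdj at h
  simp only [List.any_eq_true, Bool.or_eq_true, Bool.and_eq_true, beq_iff_eq] at h
  obtain ⟨p, hp, h⟩ := h
  rw [pv_mem_verts, pv_mem_verts]
  simp only [List.any_eq_true, Bool.or_eq_true, beq_iff_eq]
  exact ⟨⟨p, hp, by tauto⟩, ⟨p, hp, by tauto⟩⟩

theorem pv_mdeg_pos (T : List (Int × Int)) (v : Int) (h : v ∈ pvVertsOf T) :
    1 ≤ pvMdeg T v := by
  rw [pv_mem_verts] at h
  simp only [List.any_eq_true, Bool.or_eq_true, beq_iff_eq] at h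
  obtain ⟨p, hp, h⟩ := h
  unfold pvMdeg
  have hmem : ((if p.1 = v then 1 else 0) + (if p.2 = v then 1 else 0) : Nat) ∈
      T.map (fun p => (if p.1 = v then 1 else 0) + (if p.2 = v then 1 else 0)) :=
    List.mem_map.mpr ⟨p, hp, rfl⟩
  have hle : 1 ≤ ((if p.1 = v then 1 else 0) + (if p.2 = v then 1 else 0) : Nat) := by
    rcases h with h | h <;> simp [h]
  calc 1 ≤ _ := hle
    _ ≤ _ := List.single_le_sum (fun x _ => Nat.zero_le x) _ hmem

theorem pv_getD_stepDegA (d : PySem.Dict Int Int) (p : Int × Int) (v : Int) :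
    (pvStepDegA d p).getD v 0 =
      d.getD v 0 + ((if p.1 = v then 1 else 0) + (if p.2 = v then 1 else 0) : Int) := by
  obtain ⟨a, b⟩ := p
  unfold pvStepDegA
  simp only [PySem.Dict.getD_modify]
  split_ifs <;> (try subst_vars) <;> omega

theorem pv_getD_degA (T : List (Int × Int)) (v : Int) :
    ∀ d : PySem.Dict Int Int,
      (T.foldl pvStepDegA d).getD v 0 = d.getD v 0 + (pvMdeg T v : Int) := by
  induction T with
  | nil => intro d; simp [pvMdeg]
  | cons p t ih =>
    intro d
    simp only [List.foldl_cons]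
    rw [ih]
    rw [pv_getD_stepDegA]
    unfold pvMdeg
    simp only [List.map_cons, List.sum_cons]
    push_cast
    ring

theorem pv_contains_degA (T : List (Int × Int)) (v : Int) :
    ∀ d : PySem.Dict Int Int,
      (T.foldl pvStepDegA d).contains v =
        (d.contains v || T.any (fun p => p.1 == v || p.2 == v)) := by
  induction T with
  | nil => intro d; simp
  | cons p t ih =>
    intro d
    simp only [List.foldl_cons]
    rw [ih]
    unfold pvStepDegA
    simp only [PySem.Dict.contains_modify, List.any_cons]
    rw [Bool.eq_iff_iff]
    simp only [Bool.or_eq_true, beq_iff_eq]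
    constructor <;> (intro h; tauto)

theorem pv_deg_getD (T : List (Int × Int)) (v : Int) :
    (pvDeg T).getD v 0 = (pvMdeg T v : Int) := by
  show (T.foldl pvStepDegA PySem.Dict.empty).getD v 0 = _
  rw [pv_getD_degA]
  simp [PySem.Dict.getD_empty]

theorem pv_deg_contains (T : List (Int × Int)) (v : Int) :
    (pvDeg T).contains v = true ↔ v ∈ pvVertsOf T := by
  show (T.foldl pvStepDegA PySem.Dict.empty).contains v = true ↔ _
  rw [pv_contains_degA, pv_mem_verts]
  simp [PySem.Dict.contains_empty]

theorem pv_incP_cons (p : Int × Int) (t : List (Int × Int)) (S : Int → Bool) (v : Int) :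
    pvIncP (p :: t) S v =
      ((if p.1 = v ∧ S p.2 = true then 1 else 0) + (if p.2 = v ∧ S p.1 = true then 1 else 0)) +
        pvIncP t S v := by
  unfold pvIncP
  simp

theorem pv_incP_le_mdeg (T : List (Int × Int)) (S : Int → Bool) (v : Int) :
    pvIncP T S v ≤ pvMdeg T v := by
  unfold pvIncP pvMdeg
  refine List.sum_le_sum ?_
  intro p hp
  have h1 : (if p.1 = v ∧ S p.2 = true then 1 else 0) ≤ (if p.1 = v then 1 else 0) := by
    split_ifs with hA hB
    · omega
    · exact absurd hA.1 hB
    · omega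
    · omega
  have h2 : (if p.2 = v ∧ S p.1 = true then 1 else 0) ≤ (if p.2 = v then 1 else 0) := by
    split_ifs with hA hB
    · omega
    · exact absurd hA.1 hB
    · omega
    · omega
  omega

theorem pv_pair_mem_verts (T : List (Int × Int)) (p : Int × Int) (hp : p ∈ T) :
    p.1 ∈ pvVertsOf T ∧ p.2 ∈ pvVertsOf T := by
  rw [pv_mem_verts, pv_mem_verts]
  simp only [List.any_eq_true, Bool.or_eq_true, beq_iff_eq]
  exact ⟨⟨p, hp, Or.inl rfl⟩, ⟨p, hp, Or.inr rfl⟩⟩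

theorem pv_incP_congr (T : List (Int × Int)) (S S' : Int → Bool) (v : Int)
    (h : ∀ x ∈ pvVertsOf T, S x = S' x) : pvIncP T S v = pvIncP T S' v := by
  unfold pvIncP
  congr 1
  refine List.map_congr_left ?_
  intro p hp
  obtain ⟨h1, h2⟩ := pv_pair_mem_verts T p hp
  rw [h p.1 h1, h p.2 h2]

theorem pv_mdeg_eq_incP_true (T : List (Int × Int)) (v : Int) :
    pvMdeg T v = pvIncP T (fun _ => true) v := by
  unfold pvMdeg pvIncP
  simp

theorem pv_core_two_le (T : List (Int × Int)) (v : Int) (h : v ∈ pvCore T) :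
    2 ≤ pvMdeg T v := by
  unfold pvCore at h
  rw [Finset.mem_filter] at h
  obtain ⟨hv, S, hS, hvS, hall⟩ := h
  exact le_trans (hall v hvS) (pv_incP_le_mdeg T _ v)

theorem pv_core_closed (T : List (Int × Int))
    (hcross : ∀ p ∈ T, (p.1 ∈ pvCore T ↔ p.2 ∈ pvCore T)) (v x : Int)
    (h : pvAdj T v x = true) : (v ∈ pvCore T ↔ x ∈ pvCore T) := by
  unfold pvAdj at h
  simp only [List.any_eq_true, Bool.or_eq_true, Bool.and_eq_true, beq_iff_eq] at h
  obtain ⟨p, hp, h⟩ := h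
  rcases h with ⟨h1, h2⟩ | ⟨h1, h2⟩
  · rw [← h1, ← h2]; exact hcross p hp
  · rw [← h1, ← h2]; exact (hcross p hp).symm

theorem pv_U_sub_core (T : List (Int × Int)) (U : List Int)
    (hUv : ∀ u ∈ U, u ∈ pvVertsOf T)
    (hmin : ∀ u ∈ U, 2 ≤ pvIncP T (fun x => decide (x ∈ U)) u) :
    ∀ u ∈ U, u ∈ pvCore T := by
  intro u hu
  unfold pvCore
  rw [Finset.mem_filter]
  refine ⟨List.mem_toFinset.mpr (hUv u hu), U.toFinset, ?_, List.mem_toFinset.mpr hu, ?_⟩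
  · rw [Finset.mem_powerset]
    intro y hy
    exact List.mem_toFinset.mpr (hUv y (List.mem_toFinset.mp hy))
  · intro w hw
    have hwU := List.mem_toFinset.mp hw
    calc 2 ≤ pvIncP T (fun x => decide (x ∈ U)) w := hmin w hwU
      _ = pvIncP T (fun x => decide (x ∈ U.toFinset)) w :=
        pv_incP_congr T _ _ w (fun x _ => by simp [List.mem_toFinset])

theorem pv_cntA (N : List Int) (vc : PySem.Dict Int Int) :
    N.foldl (fun n a => if !vc.contains a then n + 1 else n) (0 : Int) =
      ((N.filter (fun a => !vc.contains a)).length : Int) := by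
  rw [PySem.List.foldl_if_add_one]
  rw [List.countP_eq_length_filter]
  simp

theorem pv_length_filter_split (l : List Int) (q r : Int → Bool) :
    (l.filter q).length =
      (l.filter (fun x => q x && r x)).length + (l.filter (fun x => q x && !r x)).length := by
  induction l with
  | nil => simp
  | cons a t ih =>
    simp only [List.filter_cons]
    by_cases hq : q a = true
    · by_cases hr : r a = true
      · simp [hq, hr, ih]
        omega
      · have hr' : r a = false := by simpa using hr
        simp [hq, hr', ih]
        omega
    · have hq' : q a = false := by simpa using hq
      simp [hq', ih]

theorem pv_flatMap_len (T : List (Int × Int)) :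
    (T.flatMap (fun p => [p.1, p.2])).length = 2 * T.length := by
  induction T with
  | nil => simp
  | cons p t ih => simp only [List.flatMap_cons, List.length_append, List.length_cons, ih]; simp; omega

theorem pv_foldl_add_len (l : List Int) :
    ∀ s : PySem.Set Int, (l.foldl PySem.Set.add s).length ≤ s.length + l.length := by
  induction l with
  | nil => intro s; simp
  | cons a t ih =>
    intro s
    simp only [List.foldl_cons]
    refine le_trans (ih _) ?_
    have : (PySem.Set.add s a).length ≤ s.length + 1 := by
      simp only [PySem.Set.add]
      split_ifs <;> simp
    simp only [List.length_cons]
    omega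

theorem pv_verts_len_le (T : List (Int × Int)) : (pvVertsOf T).length ≤ 2 * T.length := by
  unfold pvVertsOf
  rw [PySem.Set.ofList_eq_foldl]
  have := pv_foldl_add_len (T.flatMap (fun p => [p.1, p.2])) PySem.Set.empty
  rw [pv_flatMap_len] at this
  simpa [PySem.Set.empty] using this

theorem pv_filter_add_length (s : PySem.Set Int) (b : Int) (S : Int → Bool) :
    ((PySem.Set.add s b).filter S).length ≤
      (s.filter S).length + (if S b = true then 1 else 0) := by
  simp only [PySem.Set.add]
  by_cases h1 : s.contains b = true
  · rw [if_pos h1]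
    split_ifs <;> omega
  · rw [if_neg h1]
    rw [List.filter_append, List.length_append]
    by_cases h2 : S b = true
    · simp [h2]
    · have h2' : S b = false := by simpa using h2
      simp [h2']

theorem pv_modAdd_filter_le (n : PySem.Dict Int (PySem.Set Int)) (a b v : Int) (S : Int → Bool) :
    (((pvModAdd n a b).getD v PySem.Set.empty).filter S).length ≤
      ((n.getD v PySem.Set.empty).filter S).length + (if a = v ∧ S b = true then 1 else 0) := by
  unfold pvModAdd
  rw [pv_getD_modadd]
  by_cases h : v = a
  · rw [if_pos h]
    refine le_trans (pv_filter_add_length _ _ _) ?_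
    subst h
    by_cases h1 : S b = true
    · simp [h1]
    · simp [h1]
  · rw [if_neg h]
    split_ifs <;> omega

theorem pv_step_filter_le (d : PySem.Dict Int (PySem.Set Int)) (p : Int × Int) (v : Int)
    (S : Int → Bool) :
    (((pvStepNbrA d p).getD v PySem.Set.empty).filter S).length ≤
      ((d.getD v PySem.Set.empty).filter S).length +
        ((if p.1 = v ∧ S p.2 = true then 1 else 0) + (if p.2 = v ∧ S p.1 = true then 1 else 0)) := by
  have h : pvStepNbrA d p = pvModAdd (pvModAdd d p.1 p.2) p.2 p.1 := rfl
  rw [h]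
  have h1 := pv_modAdd_filter_le (pvModAdd d p.1 p.2) p.2 p.1 v S
  have h2 := pv_modAdd_filter_le d p.1 p.2 v S
  omega

theorem pv_count_le_incP (T : List (Int × Int)) (v : Int) (S : Int → Bool) :
    (((pvNbrs T).getD v PySem.Set.empty).filter S).length ≤ pvIncP T S v := by
  suffices h : ∀ d : PySem.Dict Int (PySem.Set Int),
      (((T.foldl pvStepNbrA d).getD v PySem.Set.empty).filter S).length ≤
        ((d.getD v PySem.Set.empty).filter S).length + pvIncP T S v by
    have := h PySem.Dict.empty
    show (((T.foldl pvStepNbrA PySem.Dict.empty).getD v PySem.Set.empty).filter S).length ≤ _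
    simpa [PySem.Dict.getD_empty, PySem.Set.empty] using this
  induction T with
  | nil => intro d; simp [pvIncP]
  | cons p t ih =>
    intro d
    simp only [List.foldl_cons]
    refine le_trans (ih _) ?_
    have := pv_step_filter_le d p v S
    rw [pv_incP_cons]
    omega

theorem pv_incP_stable (T : List (Int × Int)) (v : Int) (S S' : Int → Bool)
    (h : ∀ x, x ∈ (pvNbrs T).getD v PySem.Set.empty → S x = S' x) :
    pvIncP T S v = pvIncP T S' v := by
  unfold pvIncP
  congr 1
  refine List.map_congr_left ?_
  intro p hp
  have e1 : (if p.1 = v ∧ S p.2 = true then 1 else 0) =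
      (if p.1 = v ∧ S' p.2 = true then (1:Nat) else 0) := by
    by_cases h1 : p.1 = v
    · have hm : p.2 ∈ (pvNbrs T).getD v PySem.Set.empty := by
        rw [pv_mem_nbrs]
        unfold pvAdj
        simp only [List.any_eq_true, Bool.or_eq_true, Bool.and_eq_true, beq_iff_eq]
        exact ⟨p, hp, Or.inl ⟨h1, rfl⟩⟩
      rw [h p.2 hm]
    · simp [h1]
  have e2 : (if p.2 = v ∧ S p.1 = true then 1 else 0) =
      (if p.2 = v ∧ S' p.1 = true then (1:Nat) else 0) := by
    by_cases h1 : p.2 = v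
    · have hm : p.1 ∈ (pvNbrs T).getD v PySem.Set.empty := by
        rw [pv_mem_nbrs]
        unfold pvAdj
        simp only [List.any_eq_true, Bool.or_eq_true, Bool.and_eq_true, beq_iff_eq]
        exact ⟨p, hp, Or.inr ⟨h1, rfl⟩⟩
      rw [h p.1 hm]
    · simp [h1]
  rw [e1, e2]

theorem pv_stall (T : List (Int × Int)) :
    ∀ (fuel : Nat) (vc : PySem.Dict Int Int) (cent : Int) (shell : PySem.Set Int),
      (∀ v, vc.contains v = true → v ∈ pvVertsOf T) →
      (∀ v ∈ shell, v ∈ pvVertsOf T) →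
      (∀ v ∈ shell, vc.contains v = false) →
      vc.keys.Nodup →
      shell.Nodup →
      (pvVertsOf T).length + 1 ≤ fuel + vc.keys.length →
      (∀ v ∈ pvVertsOf T, vc.contains v = false → v ∉ shell →
        (∃ u ∈ (pvNbrs T).getD v PySem.Set.empty, u ∈ shell) ∨
          2 ≤ pvIncP T (fun x => !vc.contains x) v) →
      ∀ v ∈ pvVertsOf T,
        (pvCentLoop (pvNbrs T) fuel vc cent shell).contains v = false →
          2 ≤ pvIncP T (fun x => !(pvCentLoop (pvNbrs T) fuel vc cent shell).contains x) v := by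
  intro fuel
  induction fuel with
  | zero =>
    intro vc cent shell hkeys hshV hfresh hknd hsnd hfuel hinv
    exfalso
    have hsub : vc.keys ⊆ pvVertsOf T := fun {k} hk =>
      hkeys k ((PySem.Dict.contains_iff_mem_keys vc k).mpr hk)
    have hle : vc.keys.length ≤ (pvVertsOf T).length := by
      have h1 : vc.keys.toFinset.card = vc.keys.length := List.toFinset_card_of_nodup hknd
      have h2 : vc.keys.toFinset ⊆ (pvVertsOf T).toFinset := by
        intro y hy
        exact List.mem_toFinset.mpr (hsub (List.mem_toFinset.mp hy))
      have h3 := Finset.card_le_card h2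
      have h4 : (pvVertsOf T).toFinset.card ≤ (pvVertsOf T).length :=
        List.toFinset_card_le _
      omega
    omega
  | succ fuel ih =>
    intro vc cent shell hkeys hshV hfresh hknd hsnd hfuel hinv
    by_cases h0 : shell = []
    · intro v hv
      simp only [pvCentLoop, if_pos h0]
      intro hcon
      rcases hinv v hv hcon (by simp [h0]) with ⟨u, hu, hu2⟩ | h2
      · rw [h0] at hu2
        exact absurd hu2 (List.not_mem_nil)
      · exact h2
    · -- one round: names for the new state
      have hcont2 : ∀ x, (shell.foldl (fun d v => d.insert v cent) vc).contains x =
          (decide (x ∈ shell) || vc.contains x) := fun x =>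
        pv_contains_foldl_insert_const shell cent vc x
      have hitems2 : (shell.foldl (fun d v => d.insert v cent) vc).items =
          vc.items ++ shell.map (fun v => (v, cent)) := by
        have := PySem.Dict.items_foldl_insert_fresh shell (fun v => v) (fun _ => cent) vc
          (fun a ha => hfresh a ha) (by simpa using hsnd)
        simpa using this
      have hklen : (shell.foldl (fun d v => d.insert v cent) vc).keys.length =
          vc.keys.length + shell.length := by
        simp only [PySem.Dict.keys, hitems2]
        simp
      have hmem2A : ∀ y, y ∈ ((shell.foldl (fun s v =>
            (pvNbrs T |>.getD v PySem.Set.empty).foldl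
              (fun s adj => if !(shell.foldl (fun d v => d.insert v cent) vc).contains adj
                then PySem.Set.add s adj else s) s) PySem.Set.empty).foldl
          (fun s p => if (pvNbrs T |>.getD p PySem.Set.empty).foldl
                (fun n a => if !(shell.foldl (fun d v => d.insert v cent) vc).contains a
                  then n + 1 else n) (0 : Int) < 2
              then PySem.Set.add s p else s) PySem.Set.empty) ↔
          ((∃ v ∈ shell, y ∈ (pvNbrs T).getD v PySem.Set.empty ∧
              (shell.foldl (fun d v => d.insert v cent) vc).contains y = false) ∧
            (pvNbrs T |>.getD y PySem.Set.empty).foldl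
              (fun n a => if !(shell.foldl (fun d v => d.insert v cent) vc).contains a
                then n + 1 else n) (0 : Int) < 2) := by
        intro y
        rw [pv_mem_foldl_add_if]
        rw [pv_mem_npsA]
        simp only [PySem.Set.empty, List.not_mem_nil, false_or]
      have hnd2A : (((shell.foldl (fun s v =>
            (pvNbrs T |>.getD v PySem.Set.empty).foldl
              (fun s adj => if !(shell.foldl (fun d v => d.insert v cent) vc).contains adj
                then PySem.Set.add s adj else s) s) PySem.Set.empty).foldl
          (fun s p => if (pvNbrs T |>.getD p PySem.Set.empty).foldl
                (fun n a => if !(shell.foldl (fun d v => d.insert v cent) vc).contains a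
                  then n + 1 else n) (0 : Int) < 2
              then PySem.Set.add s p else s) PySem.Set.empty) : PySem.Set Int).Nodup := by
        refine pv_nodup_foldl_add_if _ _ _ ?_
        simp [PySem.Set.empty]
      simp only [pvCentLoop, if_neg h0]
      refine ih _ (cent + 1) _ ?_ ?_ ?_ ?_ ?_ ?_ ?_
      · intro v hcv
        rw [hcont2 v] at hcv
        rcases Bool.or_eq_true_iff.mp hcv with h | h
        · exact hshV v (by simpa using h)
        · exact hkeys v h
      · intro v hvs
        obtain ⟨⟨u, hu, hun, _⟩, _⟩ := (hmem2A v).mp hvs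
        exact (pv_nbrs_sub_verts T u v hun).1
      · intro v hvs
        obtain ⟨⟨_, _, _, hcf⟩, _⟩ := (hmem2A v).mp hvs
        exact hcf
      · exact PySem.Dict.nodup_keys_foldl_insert shell (fun _ _ => cent) vc hknd
      · exact hnd2A
      · have hpos : 1 ≤ shell.length := List.length_pos_of_ne_nil h0
        omega
      · intro v hv hcf hns
        have hcv : vc.contains v = false := by
          have := hcont2 v
          rw [hcf] at this
          rcases Bool.or_eq_false_iff.mp this.symm with ⟨_, h⟩
          exact h
        have hvnshell : v ∉ shell := by
          intro hmem
          have := hcont2 v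
          rw [hcf] at this
          rcases Bool.or_eq_false_iff.mp this.symm with ⟨h, _⟩
          simp at h
          exact h hmem
        refine Or.inr ?_
        by_cases hc : ∃ u ∈ (pvNbrs T).getD v PySem.Set.empty, u ∈ shell
        · -- v is a candidate that was rejected: its free count is ≥ 2
          have hvnps : (∃ u ∈ shell, v ∈ (pvNbrs T).getD u PySem.Set.empty ∧
              (shell.foldl (fun d v => d.insert v cent) vc).contains v = false) := by
            obtain ⟨u, hu1, hu2⟩ := hc
            exact ⟨u, hu2, (pv_nbrs_symm T v u).mp hu1, hcf⟩
          have hnot : ¬ ((pvNbrs T |>.getD v PySem.Set.empty).foldl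
              (fun n a => if !(shell.foldl (fun d v => d.insert v cent) vc).contains a
                then n + 1 else n) (0 : Int) < 2) := by
            intro hlt
            exact hns ((hmem2A v).mpr ⟨hvnps, hlt⟩)
          rw [pv_cntA] at hnot
          have h2 : 2 ≤ (((pvNbrs T).getD v PySem.Set.empty).filter
              (fun a => !(shell.foldl (fun d v => d.insert v cent) vc).contains a)).length := by
            omega
          exact le_trans h2 (pv_count_le_incP T v _)
        · -- no neighbor in the shell: the old invariant count carries over unchanged
          rcases hinv v hv hcv hvnshell with ⟨u, hu1, hu2⟩ | h2
          · exact absurd ⟨u, hu1, hu2⟩ hc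
          · have heq : pvIncP T (fun x =>
                !(shell.foldl (fun d v => d.insert v cent) vc).contains x) v =
                pvIncP T (fun x => !vc.contains x) v := by
              refine pv_incP_stable T v _ _ ?_
              intro x hx
              rw [hcont2 x]
              have hxs : x ∉ shell := fun hmem => hc ⟨x, hx, hmem⟩
              simp [hxs]
            rw [heq]
            exact h2

theorem pv_leaf_mem (T : List (Int × Int)) (y : Int) :
    y ∈ pvLeaves T ↔ (y ∈ pvVertsOf T ∧ pvMdeg T y = 1) := by
  unfold pvLeaves
  rw [PySem.List.mem_sorted]
  rw [pv_contains_getD_one _ (pv_nodup_keys_degA T) y]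
  rw [pv_deg_contains]
  constructor
  · rintro ⟨h1, h2⟩
    refine ⟨h1, ?_⟩
    have := pv_deg_getD T y
    rw [h2] at this
    exact_mod_cast this.symm
  · rintro ⟨h1, h2⟩
    refine ⟨h1, ?_⟩
    rw [pv_deg_getD T y, h2]
    rfl

theorem pv_cent_eq (T : List (Int × Int)) :
    pvCent T = pvCentLoop (pvNbrs T) (2 * T.length + 1) PySem.Dict.empty 0
      (PySem.Set.ofList (pvLeaves T)) := rfl

theorem pv_core_disj (T : List (Int × Int))
    (hcross : ∀ p ∈ T, (p.1 ∈ pvCore T ↔ p.2 ∈ pvCore T)) :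
    ∀ (fuel : Nat) (vc : PySem.Dict Int Int) (cent : Int) (shell : PySem.Set Int),
      (∀ v ∈ shell, v ∉ pvCore T) →
      (∀ v, vc.contains v = true → v ∉ pvCore T) →
      ∀ v, (pvCentLoop (pvNbrs T) fuel vc cent shell).contains v = true → v ∉ pvCore T := by
  intro fuel
  induction fuel with
  | zero =>
    intro vc cent shell hsh hvc v h
    exact hvc v h
  | succ fuel ih =>
    intro vc cent shell hsh hvc v
    by_cases h0 : shell = []
    · simp only [pvCentLoop, if_pos h0]
      exact hvc v
    · have hcont2 : ∀ x, (shell.foldl (fun d v => d.insert v cent) vc).contains x =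
          (decide (x ∈ shell) || vc.contains x) := fun x =>
        pv_contains_foldl_insert_const shell cent vc x
      have hmem2A : ∀ y, y ∈ ((shell.foldl (fun s v =>
            (pvNbrs T |>.getD v PySem.Set.empty).foldl
              (fun s adj => if !(shell.foldl (fun d v => d.insert v cent) vc).contains adj
                then PySem.Set.add s adj else s) s) PySem.Set.empty).foldl
          (fun s p => if (pvNbrs T |>.getD p PySem.Set.empty).foldl
                (fun n a => if !(shell.foldl (fun d v => d.insert v cent) vc).contains a
                  then n + 1 else n) (0 : Int) < 2
              then PySem.Set.add s p else s) PySem.Set.empty) ↔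
          ((∃ v ∈ shell, y ∈ (pvNbrs T).getD v PySem.Set.empty ∧
              (shell.foldl (fun d v => d.insert v cent) vc).contains y = false) ∧
            (pvNbrs T |>.getD y PySem.Set.empty).foldl
              (fun n a => if !(shell.foldl (fun d v => d.insert v cent) vc).contains a
                then n + 1 else n) (0 : Int) < 2) := by
        intro y
        rw [pv_mem_foldl_add_if]
        rw [pv_mem_npsA]
        simp only [PySem.Set.empty, List.not_mem_nil, false_or]
      simp only [pvCentLoop, if_neg h0]
      refine ih _ (cent + 1) _ ?_ ?_ v
      · intro y hy
        obtain ⟨⟨u, hu, hun, _⟩, _⟩ := (hmem2A y).mp hy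
        have hadj : pvAdj T u y = true := (pv_mem_nbrs T u y).mp hun
        intro hyc
        exact hsh u hu ((pv_core_closed T hcross u y hadj).mpr hyc)
      · intro y hy
        rw [hcont2 y] at hy
        rcases Bool.or_eq_true_iff.mp hy with h | h
        · exact hsh y (by simpa using h)
        · exact hvc y h

theorem pv_hall (T : List (Int × Int)) (hpre : Pre_T_to_outside_in_edges T) :
    ∀ v x, (pvCent T).contains v = true → x ∈ (pvNbrs T).getD v PySem.Set.empty →
      (pvCent T).contains x = true := by
  rcases hpre with hnl | hcross
  · -- no vertex of degree 1: nothing is ever assigned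
    have hleaves : pvLeaves T = [] := by
      rw [List.eq_nil_iff_forall_not_mem]
      intro y hy
      obtain ⟨h1, h2⟩ := (pv_leaf_mem T y).mp hy
      exact hnl y h1 h2
    intro v x hv _
    exfalso
    unfold pvCent at hv
    rw [hleaves] at hv
    have hofl : (PySem.Set.ofList ([] : List Int)) = ([] : PySem.Set Int) := rfl
    rw [hofl] at hv
    simp [pvCentLoop, PySem.Dict.contains_empty] at hv
  · intro v x hv hx
    by_contra hxf
    have hxf' : (pvCent T).contains x = false := by simpa using hxf
    have hxv : x ∈ pvVertsOf T := (pv_nbrs_sub_verts T v x hx).1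
    have hsh0core : ∀ y ∈ (PySem.Set.ofList (pvLeaves T) : PySem.Set Int), y ∉ pvCore T := by
      intro y hy hyc
      rw [PySem.Set.mem_ofList] at hy
      obtain ⟨_, h1⟩ := (pv_leaf_mem T y).mp hy
      have := pv_core_two_le T y hyc
      omega
    have hsh0V : ∀ y ∈ (PySem.Set.ofList (pvLeaves T) : PySem.Set Int), y ∈ pvVertsOf T := by
      intro y hy
      rw [PySem.Set.mem_ofList] at hy
      exact ((pv_leaf_mem T y).mp hy).1
    have hstall := pv_stall T (2 * T.length + 1) PySem.Dict.empty 0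
      (PySem.Set.ofList (pvLeaves T))
      (fun v h => absurd h (by simp [PySem.Dict.contains_empty]))
      hsh0V
      (fun v _ => PySem.Dict.contains_empty v)
      PySem.Dict.nodup_keys_empty
      (PySem.Set.nodup_ofList _)
      (by
        have := pv_verts_len_le T
        have hk : (PySem.Dict.empty : PySem.Dict Int Int).keys.length = 0 := by
          simp [PySem.Dict.empty, PySem.Dict.keys]
        omega)
      (by
        intro y hy _ hns
        refine Or.inr ?_
        have h1 : pvMdeg T y ≠ 1 := by
          intro h
          exact hns (by rw [PySem.Set.mem_ofList]; exact (pv_leaf_mem T y).mpr ⟨hy, h⟩)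
        have h2 : 1 ≤ pvMdeg T y := pv_mdeg_pos T y hy
        have h3 : 2 ≤ pvMdeg T y := by omega
        rw [pv_mdeg_eq_incP_true] at h3
        rwa [pv_incP_congr T (fun _ => true)
          (fun x => !(PySem.Dict.empty : PySem.Dict Int Int).contains x) y
          (fun x _ => by simp [PySem.Dict.contains_empty])] at h3)
    rw [← pv_cent_eq] at hstall
    have hxcore : x ∈ pvCore T := by
      refine pv_U_sub_core T ((pvVertsOf T).filter (fun y => !(pvCent T).contains y)) ?_ ?_ x ?_
      · intro u hu
        exact (List.mem_filter.mp hu).1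
      · intro u hu
        obtain ⟨hu1, hu2⟩ := List.mem_filter.mp hu
        have h2 := hstall u hu1 (by simpa using hu2)
        rwa [pv_incP_congr T _
          (fun y => decide (y ∈ (pvVertsOf T).filter (fun y => !(pvCent T).contains y))) u
          (fun y hy => by
            simp only [List.mem_filter]
            by_cases hc : (pvCent T).contains y = true <;> simp [hc, hy])] at h2
      · exact List.mem_filter.mpr ⟨hxv, by simpa using hxf'⟩
    have hvncore : v ∉ pvCore T := by
      refine pv_core_disj T hcross (2 * T.length + 1) PySem.Dict.empty 0
        (PySem.Set.ofList (pvLeaves T)) hsh0core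
        (fun y h => absurd h (by simp [PySem.Dict.contains_empty])) v hv
    have hadj : pvAdj T v x = true := (pv_mem_nbrs T v x).mp hx
    exact hvncore ((pv_core_closed T hcross v x hadj).mpr hxcore)

-- ===== B-side stamping-round analysis =====

theorem pv_stamp_inner (l : List Int) (v : Int) :
    ∀ (t r : PySem.Dict Int Int) (s : PySem.Set Int),
      l.foldl (fun st p => (st.1.insert p v, st.2.1.modify p 0 (fun n => n - 1),
          PySem.Set.add st.2.2 p)) (t, r, s) =
        (l.foldl (fun t p => t.insert p v) t,
         l.foldl (fun r p => r.modify p 0 (fun n => n - 1)) r,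
         l.foldl (fun s p => PySem.Set.add s p) s) := by
  induction l with
  | nil => intro t r s; rfl
  | cons a tl ih => intro t r s; simpa using ih _ _ _

theorem pv_stamp_split (nbr : PySem.Dict Int (PySem.Set Int)) (shell : List Int) :
    ∀ (t r : PySem.Dict Int Int) (s : PySem.Set Int),
      shell.foldl (pvStampB nbr) (t, r, s) =
        (shell.foldl (fun t v => (nbr.getD v PySem.Set.empty).foldl
            (fun t p => t.insert p v) t) t,
         shell.foldl (fun r v => (nbr.getD v PySem.Set.empty).foldl
             (fun r p => r.modify p 0 (fun n => n - 1)) r) r,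
         shell.foldl (fun s v => (nbr.getD v PySem.Set.empty).foldl
             (fun s p => PySem.Set.add s p) s) s) := by
  induction shell with
  | nil => intro t r s; rfl
  | cons a tl ih =>
    intro t r s
    simp only [List.foldl_cons]
    rw [show pvStampB nbr (t, r, s) a =
        ((nbr.getD a PySem.Set.empty).foldl (fun t p => t.insert p a) t,
         (nbr.getD a PySem.Set.empty).foldl (fun r p => r.modify p 0 (fun n => n - 1)) r,
         (nbr.getD a PySem.Set.empty).foldl (fun s p => PySem.Set.add s p) s) from
      pv_stamp_inner _ a t r s]
    exact ih _ _ _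

theorem pv_target_inner (l : List Int) (v : Int) :
    ∀ (t : PySem.Dict Int Int) (p : Int),
      (l.foldl (fun t q => t.insert q v) t).get? p =
        if p ∈ l then some v else t.get? p := by
  induction l with
  | nil => intro t p; simp
  | cons a tl ih =>
    intro t p
    simp only [List.foldl_cons]
    rw [ih]
    by_cases h : p ∈ tl
    · rw [if_pos h, if_pos (List.mem_cons_of_mem _ h)]
    · rw [if_neg h, PySem.Dict.get?_insert]
      by_cases h2 : p = a
      · rw [if_pos h2, if_pos (by simp [h2])]
      · rw [if_neg h2, if_neg (by simp [h2, h])]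

theorem pv_target_outer (nbr : PySem.Dict Int (PySem.Set Int)) (shell : List Int) :
    ∀ (t : PySem.Dict Int Int) (p : Int),
      (shell.foldl (fun t v => (nbr.getD v PySem.Set.empty).foldl
          (fun t q => t.insert q v) t) t).get? p =
        match (shell.filter (fun v => decide (p ∈ nbr.getD v PySem.Set.empty))).getLast? with
        | some v => some v
        | none => t.get? p := by
  induction shell with
  | nil => intro t p; rfl
  | cons a tl ih =>
    intro t p
    simp only [List.foldl_cons]
    rw [ih, List.filter_cons]
    by_cases h : p ∈ nbr.getD a PySem.Set.empty
    · rw [if_pos (by simpa using h)]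
      cases hxs : tl.filter (fun v => decide (p ∈ nbr.getD v PySem.Set.empty)) with
      | nil =>
        simp only [List.getLast?_nil, List.getLast?_singleton]
        rw [pv_target_inner, if_pos h]
      | cons b bs =>
        have hsome : ((b :: bs).getLast?).isSome := List.getLast?_isSome.mpr (by simp)
        obtain ⟨w, hw⟩ := Option.isSome_iff_exists.mp hsome
        rw [List.getLast?_cons_cons, hw]
    · rw [if_neg (by simpa using h)]
      cases hxs : tl.filter (fun v => decide (p ∈ nbr.getD v PySem.Set.empty)) with
      | nil =>
        simp only [List.getLast?_nil]
        rw [pv_target_inner, if_neg h]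
      | cons b bs =>
        have hsome : ((b :: bs).getLast?).isSome := List.getLast?_isSome.mpr (by simp)
        obtain ⟨w, hw⟩ := Option.isSome_iff_exists.mp hsome
        rw [hw]

theorem pv_rdeg_inner (l : List Int) :
    ∀ (r : PySem.Dict Int Int) (p : Int),
      (l.foldl (fun r q => r.modify q 0 (fun n => n - 1)) r).getD p 0 =
        r.getD p 0 - (l.count p : Int) := by
  induction l with
  | nil => intro r p; simp
  | cons a tl ih =>
    intro r p
    simp only [List.foldl_cons]
    rw [ih, PySem.Dict.getD_modify]
    by_cases h : p = a
    · rw [if_pos h, h, List.count_cons_self]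
      push_cast
      ring
    · rw [if_neg h, List.count_cons_of_ne (fun e => h e.symm)]

theorem pv_rdeg_outer (nbr : PySem.Dict Int (PySem.Set Int))
    (hnd : ∀ v, (nbr.getD v PySem.Set.empty).Nodup) (shell : List Int) :
    ∀ (r : PySem.Dict Int Int) (p : Int),
      (shell.foldl (fun r v => (nbr.getD v PySem.Set.empty).foldl
          (fun r q => r.modify q 0 (fun n => n - 1)) r) r).getD p 0 =
        r.getD p 0 -
          ((shell.filter (fun v => decide (p ∈ nbr.getD v PySem.Set.empty))).length : Int) := by
  induction shell with
  | nil => intro r p; simp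
  | cons a tl ih =>
    intro r p
    simp only [List.foldl_cons]
    rw [ih, pv_rdeg_inner, List.filter_cons]
    by_cases h : p ∈ nbr.getD a PySem.Set.empty
    · rw [if_pos (by simpa using h)]
      have hc : (nbr.getD a PySem.Set.empty).count p = 1 := List.count_eq_one_of_mem (hnd a) h
      rw [hc]
      simp only [List.length_cons]
      push_cast
      ring
    · rw [if_neg (by simpa using h)]
      have hc : (nbr.getD a PySem.Set.empty).count p = 0 := List.count_eq_zero.mpr h
      rw [hc]
      push_cast
      ring

theorem pv_touched_mem (nbr : PySem.Dict Int (PySem.Set Int)) (shell : List Int) :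
    ∀ (s : PySem.Set Int) (p : Int),
      p ∈ shell.foldl (fun s v => (nbr.getD v PySem.Set.empty).foldl
          (fun s q => PySem.Set.add s q) s) s ↔
        p ∈ s ∨ ∃ v ∈ shell, p ∈ nbr.getD v PySem.Set.empty := by
  have hup : ∀ (l : List Int) (s : PySem.Set Int) (p : Int),
      (p ∈ l.foldl (fun s q => PySem.Set.add s q) s) ↔ p ∈ s ∨ p ∈ l := by
    intro l
    induction l with
    | nil => simp
    | cons a tl ih =>
      intro s p
      simp only [List.foldl_cons]
      rw [ih, PySem.Set.mem_add]
      constructor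
      · rintro ((h | h) | h)
        · exact Or.inl h
        · exact Or.inr (h ▸ List.mem_cons_self)
        · exact Or.inr (List.mem_cons_of_mem _ h)
      · rintro (h | h)
        · exact Or.inl (Or.inl h)
        · rcases List.mem_cons.mp h with rfl | h
          · exact Or.inl (Or.inr rfl)
          · exact Or.inr h
  induction shell with
  | nil => simp
  | cons a tl ih =>
    intro s p
    simp only [List.foldl_cons]
    rw [ih, hup]
    constructor
    · rintro ((h | h) | ⟨v, hv, h⟩)
      · exact Or.inl h
      · exact Or.inr ⟨a, List.mem_cons_self, h⟩
      · exact Or.inr ⟨v, List.mem_cons_of_mem _ hv, h⟩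
    · rintro (h | ⟨v, hv, h⟩)
      · exact Or.inl (Or.inl h)
      · rcases List.mem_cons.mp hv with rfl | hv
        · exact Or.inl (Or.inr h)
        · exact Or.inr ⟨v, hv, h⟩

theorem pv_touched_nodup (nbr : PySem.Dict Int (PySem.Set Int)) (shell : List Int) :
    ∀ (s : PySem.Set Int), s.Nodup →
      (shell.foldl (fun s v => (nbr.getD v PySem.Set.empty).foldl
          (fun s q => PySem.Set.add s q) s) s).Nodup := by
  have hup : ∀ (l : List Int) (s : PySem.Set Int), s.Nodup →
      (l.foldl (fun s q => PySem.Set.add s q) s).Nodup := by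
    intro l
    induction l with
    | nil => intro s hs; simpa using hs
    | cons a tl ih =>
      intro s hs
      simp only [List.foldl_cons]
      exact ih _ (PySem.Set.nodup_add s a hs)
  induction shell with
  | nil => intro s hs; simpa using hs
  | cons a tl ih =>
    intro s hs
    simp only [List.foldl_cons]
    exact ih _ (hup _ _ hs)

-- ===== running lexicographic maximum and B-side bookkeeping =====

def pvAMaxStep (acc : Option (Int × Int)) (y : Int × Int) : Option (Int × Int) :=
  match acc with
  | none => some y
  | some b => if b.1 < y.1 ∨ (b.1 = y.1 ∧ b.2 < y.2) then some y else some b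

def pvAMax (l : List (Int × Int)) : Option (Int × Int) := l.foldl pvAMaxStep none

theorem pv_aMax_step_none (y : Int × Int) : pvAMaxStep none y = some y := rfl

theorem pv_aMax_step_lt (b y : Int × Int) (h : pvLexLt b y) : pvAMaxStep (some b) y = some y := by
  unfold pvLexLt at h
  show (if b.1 < y.1 ∨ (b.1 = y.1 ∧ b.2 < y.2) then some y else some b) = some y
  rw [if_pos h]

theorem pv_aMax_step_ge (b y : Int × Int) (h : ¬ pvLexLt b y) :
    pvAMaxStep (some b) y = some b := by
  unfold pvLexLt at h
  show (if b.1 < y.1 ∨ (b.1 = y.1 ∧ b.2 < y.2) then some y else some b) = some b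
  rw [if_neg h]

theorem pv_aMax_step_total (acc : Option (Int × Int)) (x : Int × Int) :
    ∃ r, pvAMaxStep acc x = some r := by
  cases acc with
  | none => exact ⟨x, rfl⟩
  | some c =>
    by_cases h : pvLexLt c x
    · exact ⟨x, pv_aMax_step_lt c x h⟩
    · exact ⟨c, pv_aMax_step_ge c x h⟩

theorem pv_aMax_eq_of_max (l : List (Int × Int)) (m : Int × Int) (hm : m ∈ l)
    (hmax : ∀ y ∈ l, ¬ pvLexLt m y) : pvAMax l = some m := by
  cases hl : l with
  | nil => rw [hl] at hm; exact absurd hm (List.not_mem_nil)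
  | cons a ta =>
    unfold pvAMax
    simp only [List.foldl_cons]
    rw [show pvAMaxStep none a = some a from rfl]
    obtain ⟨m', hm'⟩ := pv_scan_isSome pvAMaxStep pv_aMax_step_total ta a
    rw [hm']
    obtain ⟨hmem, hmax', hacc⟩ := pv_scan_spec (fun (y : Int × Int) => y) pvAMaxStep
      pv_aMax_step_none pv_aMax_step_lt pv_aMax_step_ge ta (some a) m' hm'
    have hm'mem : m' ∈ l := by
      rw [hl]
      rcases hmem with h | h
      · exact (Option.some_inj.mp h) ▸ List.mem_cons_self
      · exact List.mem_cons_of_mem _ (by simpa using h)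
    have hm'max : ∀ y ∈ l, ¬ pvLexLt m' y := by
      intro y hy
      rw [hl] at hy
      rcases List.mem_cons.mp hy with rfl | hy
      · exact hacc _ rfl
      · exact hmax' y (by simpa using hy)
    have h1 : ¬ pvLexLt m m' := hmax m' hm'mem
    have h2 : ¬ pvLexLt m' m := hm'max m hm
    unfold pvLexLt at h1 h2
    obtain ⟨a1, a2⟩ := m
    obtain ⟨b1, b2⟩ := m'
    simp only [not_or, not_and, not_lt] at h1 h2
    have h3 : b1 = a1 ∧ b2 = a2 := by omega
    rw [h3.1, h3.2]

theorem pv_filter_mem_comm (l1 l2 : List Int) (h1 : l1.Nodup) (h2 : l2.Nodup) :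
    (l1.filter (fun x => decide (x ∈ l2))).length =
      (l2.filter (fun x => decide (x ∈ l1))).length := by
  have hperm : (l1.filter (fun x => decide (x ∈ l2))).Perm
      (l2.filter (fun x => decide (x ∈ l1))) := by
    refine (List.perm_ext_iff_of_nodup (h1.filter _) (h2.filter _)).mpr ?_
    intro y
    simp only [List.mem_filter, decide_eq_true_eq]
    exact and_comm
  exact hperm.length_eq

theorem pv_nodup_keys_nbrB (T : List (Int × Int)) : ((pvDegNbrAlt T).2).keys.Nodup := by
  rw [pv_split]
  suffices h : ∀ d : PySem.Dict Int (PySem.Set Int), d.keys.Nodup →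
      (T.foldl pvStepNbrB d).keys.Nodup by
    exact h _ PySem.Dict.nodup_keys_empty
  induction T with
  | nil => intro d h; exact h
  | cons p t ih =>
    intro d h
    refine ih _ ?_
    have hsd : ∀ (n : PySem.Dict Int (PySem.Set Int)) (k : Int),
        n.keys.Nodup → (n.setdefault k PySem.Set.empty).keys.Nodup := by
      intro n k hn
      by_cases hc : n.contains k = true
      · rw [PySem.Dict.setdefault_of_contains _ _ hc]
        exact hn
      · rw [PySem.Dict.setdefault_of_not_contains _ _ (by simpa using hc)]
        exact PySem.Dict.nodup_keys_insert _ _ _ hn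
    exact PySem.Dict.nodup_keys_insert _ _ _ (hsd _ _
      (PySem.Dict.nodup_keys_insert _ _ _ (hsd _ _ h)))

theorem pv_get?_foldl_insert_fn (F : Int → Int) (ks : List Int) :
    ∀ (d : PySem.Dict Int Int) (p : Int),
      (ks.foldl (fun d k => d.insert k (F k)) d).get? p =
        if p ∈ ks then some (F p) else d.get? p := by
  induction ks with
  | nil => intro d p; simp
  | cons a t ih =>
    intro d p
    simp only [List.foldl_cons]
    rw [ih]
    by_cases h : p ∈ t
    · rw [if_pos h, if_pos (List.mem_cons_of_mem _ h)]
    · rw [if_neg h, PySem.Dict.get?_insert]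
      by_cases h2 : p = a
      · rw [if_pos h2, if_pos (by simp [h2]), h2]
      · rw [if_neg h2, if_neg (by simp [h2, h])]

theorem pv_rdeg_init (T : List (Int × Int)) (p : Int) :
    (((pvDegNbrAlt T).2).items.foldl
        (fun d q => d.insert q.1 (PySem.Set.len q.2)) PySem.Dict.empty).getD p 0 =
      ((((pvDegNbrAlt T).2).getD p PySem.Set.empty).length : Int) := by
  rw [PySem.Dict.items_eq_map_keys _ (pv_nodup_keys_nbrB T) PySem.Set.empty]
  rw [List.foldl_map]
  rw [PySem.Dict.getD_eq_get?_getD]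
  rw [pv_get?_foldl_insert_fn (fun k => PySem.Set.len (((pvDegNbrAlt T).2).getD k PySem.Set.empty))]
  by_cases h : p ∈ ((pvDegNbrAlt T).2).keys
  · rw [if_pos h]
    simp [PySem.Set.len]
  · rw [if_neg h]
    have : ((pvDegNbrAlt T).2).getD p PySem.Set.empty = PySem.Set.empty := by
      rw [PySem.Dict.getD_eq_get?_getD]
      have hc : ((pvDegNbrAlt T).2).contains p = false := by
        rw [← Bool.not_eq_true]
        intro hc
        exact h ((PySem.Dict.contains_iff_mem_keys _ p).mp hc)
      rw [PySem.Dict.contains_eq_isSome_get?] at hc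
      cases hq : ((pvDegNbrAlt T).2).get? p with
      | none => rfl
      | some w => rw [hq] at hc; simp at hc
    rw [this]
    simp [PySem.Dict.get?_empty, PySem.Set.empty]

def pvPairs (T : List (Int × Int)) (vc : PySem.Dict Int Int) (p : Int) : List (Int × Int) :=
  (((pvDegNbrAlt T).2).getD p PySem.Set.empty).filterMap
    (fun x => (vc.get? x).map (fun c => (c, x)))

theorem pv_getLast?_max (l : List Int) (hp : l.Pairwise (· < ·)) :
    ∀ w, l.getLast? = some w → w ∈ l ∧ ∀ y ∈ l, y ≤ w := by
  induction l with
  | nil => intro w hw; simp at hw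
  | cons a t ih =>
    intro w hw
    cases t with
    | nil =>
      simp at hw
      subst hw
      exact ⟨List.mem_cons_self, by simp⟩
    | cons b s =>
      rw [List.getLast?_cons_cons] at hw
      obtain ⟨hmem, hmax⟩ := ih (List.pairwise_cons.mp hp).2 w hw
      refine ⟨List.mem_cons_of_mem _ hmem, ?_⟩
      intro y hy
      rcases List.mem_cons.mp hy with rfl | hy
      · exact le_of_lt ((List.pairwise_cons.mp hp).1 w hmem)
      · exact hmax y hy

theorem pv_loop2 (T : List (Int × Int)) :
    ∀ (fuel : Nat) (vcA : PySem.Dict Int Int) (cent : Int) (shellA : PySem.Set Int)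
      (asg : PySem.Set Int) (order : List Int) (target rdeg : PySem.Dict Int Int)
      (shellB : List Int) (L : List (Int × Int)),
      vcA.keys.Nodup →
      shellA.Nodup →
      shellB = PySem.List.sorted shellA (fun v => v) false →
      (∀ v ∈ shellA, vcA.contains v = false) →
      (∀ q ∈ vcA.items, q.2 < cent) →
      order = L.map (fun q => q.2) →
      L.Perm (vcA.items.map (fun q => (q.2, q.1))) →
      L.Pairwise pvLexLt →
      (∀ x, x ∈ asg ↔ vcA.contains x = true) →
      asg.Nodup →
      (∀ p, rdeg.getD p 0 =
        (((((pvDegNbrAlt T).2).getD p PySem.Set.empty).filter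
            (fun x => !vcA.contains x)).length : Int)) →
      (∀ p, target.get? p = Option.map Prod.snd (pvAMax (pvPairs T vcA p))) →
      (pvPeelB ((pvDegNbrAlt T).2) fuel asg order target rdeg shellB).1 =
          (PySem.List.sorted2
            ((pvCentLoop (pvNbrs T) fuel vcA cent shellA).items.map (fun q => (q.2, q.1)))
            (fun r => r.1) (fun r => r.2) false).map (fun r => r.2) ∧
      (∀ p, (pvPeelB ((pvDegNbrAlt T).2) fuel asg order target rdeg shellB).2.get? p =
          Option.map Prod.snd (pvAMax (pvPairs T (pvCentLoop (pvNbrs T) fuel vcA cent shellA) p))) := by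
  intro fuel
  induction fuel with
  | zero =>
    intro vcA cent shellA asg order target rdeg shellB L hknd hshA hshB hfresh hbound hord hLp hLw
      hasg hasgnd hrdeg htar
    simp only [pvCentLoop, pvPeelB]
    refine ⟨?_, htar⟩
    rw [pv_sorted2_eq_of_perm_of_pairwise _ L hLp hLw]
    exact hord
  | succ fuel ih =>
    intro vcA cent shellA asg order target rdeg shellB L hknd hshA hshB hfresh hbound hord hLp hLw
      hasg hasgnd hrdeg htar
    by_cases hA0 : shellA = []
    · have hB0 : shellB = [] := by rw [hshB, hA0]; rfl
      simp only [pvCentLoop, pvPeelB, if_pos hA0, if_pos hB0]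
      refine ⟨?_, htar⟩
      rw [pv_sorted2_eq_of_perm_of_pairwise _ L hLp hLw]
      exact hord
    · have hB0 : shellB ≠ [] := by
        rw [hshB]
        intro h
        exact hA0 ((PySem.List.sorted_eq_nil_iff shellA _ false).mp h)
      -- shared membership facts
      have hmemAB : ∀ x, x ∈ shellA ↔ x ∈ shellB := by
        intro x
        rw [hshB]
        exact ((PySem.List.sorted_perm shellA (fun v => v) false).mem_iff).symm
      have hshBnd : shellB.Nodup := by
        rw [hshB]
        exact (PySem.List.sorted_perm shellA (fun v => v) false).nodup_iff.mpr hshA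
      have hshBsorted : shellB.Pairwise (· < ·) := by
        rw [hshB]
        exact pv_pairwise_lt_of_le (PySem.List.sorted_pairwise shellA (fun v => v)) (by
          rw [← hshB]; exact hshBnd)
      have hNB := pv_nbr_rel T
      have hNBnd : ∀ v, (((pvDegNbrAlt T).2).getD v PySem.Set.empty).Nodup :=
        fun v => ((hNB v).1).2
      have hmemN : ∀ v x, x ∈ ((pvDegNbrAlt T).2).getD v PySem.Set.empty ↔
          x ∈ (pvNbrs T).getD v PySem.Set.empty := fun v x => ((hNB v).2 x).symm
      have hsymB : ∀ v x, x ∈ ((pvDegNbrAlt T).2).getD v PySem.Set.empty ↔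
          v ∈ ((pvDegNbrAlt T).2).getD x PySem.Set.empty := by
        intro v x
        rw [hmemN v x, hmemN x v]
        exact pv_nbrs_symm T v x
      -- A-side round state
      have h1 : ∀ k,
          (shellA.foldl (fun d v => d.insert v cent) vcA).get? k =
            if k ∈ shellA then some cent else vcA.get? k := fun k =>
        pv_get?_foldl_insert_const shellA cent vcA k
      have hcont2 : ∀ x, (shellA.foldl (fun d v => d.insert v cent) vcA).contains x =
          (decide (x ∈ shellA) || vcA.contains x) := fun x =>
        pv_contains_foldl_insert_const shellA cent vcA x
      have hknd2 : (shellA.foldl (fun d v => d.insert v cent) vcA).keys.Nodup :=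
        PySem.Dict.nodup_keys_foldl_insert shellA (fun _ _ => cent) vcA hknd
      have hitems2 : (shellA.foldl (fun d v => d.insert v cent) vcA).items =
          vcA.items ++ shellA.map (fun v => (v, cent)) := by
        have := PySem.Dict.items_foldl_insert_fresh shellA (fun v => v) (fun _ => cent) vcA
          (fun a ha => hfresh a ha) (by simpa using hshA)
        simpa using this
      have hmem2A : ∀ y, y ∈ ((shellA.foldl (fun s v =>
            (pvNbrs T |>.getD v PySem.Set.empty).foldl
              (fun s adj => if !(shellA.foldl (fun d v => d.insert v cent) vcA).contains adj
                then PySem.Set.add s adj else s) s) PySem.Set.empty).foldl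
          (fun s p => if (pvNbrs T |>.getD p PySem.Set.empty).foldl
                (fun n a => if !(shellA.foldl (fun d v => d.insert v cent) vcA).contains a
                  then n + 1 else n) (0 : Int) < 2
              then PySem.Set.add s p else s) PySem.Set.empty) ↔
          ((∃ v ∈ shellA, y ∈ (pvNbrs T).getD v PySem.Set.empty ∧
              (shellA.foldl (fun d v => d.insert v cent) vcA).contains y = false) ∧
            (pvNbrs T |>.getD y PySem.Set.empty).foldl
              (fun n a => if !(shellA.foldl (fun d v => d.insert v cent) vcA).contains a
                then n + 1 else n) (0 : Int) < 2) := by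
        intro y
        rw [pv_mem_foldl_add_if]
        rw [pv_mem_npsA]
        simp only [PySem.Set.empty, List.not_mem_nil, false_or]
      have hnd2A : (((shellA.foldl (fun s v =>
            (pvNbrs T |>.getD v PySem.Set.empty).foldl
              (fun s adj => if !(shellA.foldl (fun d v => d.insert v cent) vcA).contains adj
                then PySem.Set.add s adj else s) s) PySem.Set.empty).foldl
          (fun s p => if (pvNbrs T |>.getD p PySem.Set.empty).foldl
                (fun n a => if !(shellA.foldl (fun d v => d.insert v cent) vcA).contains a
                  then n + 1 else n) (0 : Int) < 2
              then PySem.Set.add s p else s) PySem.Set.empty) : PySem.Set Int).Nodup := by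
        refine pv_nodup_foldl_add_if _ _ _ ?_
        simp [PySem.Set.empty]
      -- B-side round state: split the stamping fold
      have hsplit := pv_stamp_split ((pvDegNbrAlt T).2) shellB target rdeg PySem.Set.empty
      -- per-vertex "hits": the shell vertices adjacent to p, in ascending order
      have hhits : ∀ p, shellB.filter
            (fun v => decide (p ∈ ((pvDegNbrAlt T).2).getD v PySem.Set.empty)) =
          shellB.filter (fun v => decide (v ∈ ((pvDegNbrAlt T).2).getD p PySem.Set.empty)) := by
        intro p
        refine List.filter_congr ?_
        intro v _
        simp only [decide_eq_decide]
        exact (hsymB v p)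
      have hhitlen : ∀ p, ((shellB.filter
            (fun v => decide (p ∈ ((pvDegNbrAlt T).2).getD v PySem.Set.empty))).length : Int) =
          (((((pvDegNbrAlt T).2).getD p PySem.Set.empty).filter
            (fun x => decide (x ∈ shellB))).length : Int) := by
        intro p
        rw [hhits p]
        exact congrArg (fun n : Nat => (n : Int)) (pv_filter_mem_comm shellB _ hshBnd (hNBnd p))
      -- the updated residual-degree invariant
      have hrdeg2 : ∀ p, (shellB.foldl (fun r v => (((pvDegNbrAlt T).2).getD v
            PySem.Set.empty).foldl (fun r q => r.modify q 0 (fun n => n - 1)) r) rdeg).getD p 0 =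
          (((((pvDegNbrAlt T).2).getD p PySem.Set.empty).filter
            (fun x => !(shellA.foldl (fun d v => d.insert v cent) vcA).contains x)).length : Int) := by
        intro p
        rw [pv_rdeg_outer _ hNBnd, hrdeg p, hhitlen p]
        have hsplitlen := pv_length_filter_split
          (((pvDegNbrAlt T).2).getD p PySem.Set.empty)
          (fun x => !vcA.contains x) (fun x => decide (x ∈ shellB))
        have hc1 : (((pvDegNbrAlt T).2).getD p PySem.Set.empty).filter
            (fun x => (!vcA.contains x) && decide (x ∈ shellB)) =
            (((pvDegNbrAlt T).2).getD p PySem.Set.empty).filter (fun x => decide (x ∈ shellB)) := by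
          refine List.filter_congr ?_
          intro x _
          by_cases hx : x ∈ shellB
          · have : vcA.contains x = false := hfresh x ((hmemAB x).mpr hx)
            simp [hx, this]
          · simp [hx]
        have hc2 : (((pvDegNbrAlt T).2).getD p PySem.Set.empty).filter
            (fun x => (!vcA.contains x) && !decide (x ∈ shellB)) =
            (((pvDegNbrAlt T).2).getD p PySem.Set.empty).filter
              (fun x => !(shellA.foldl (fun d v => d.insert v cent) vcA).contains x) := by
          refine List.filter_congr ?_
          intro x _
          rw [hcont2 x]
          by_cases hx : x ∈ shellB
          · have hxA : x ∈ shellA := (hmemAB x).mpr hx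
            simp [hx, hxA]
          · have hxA : x ∉ shellA := fun h => hx ((hmemAB x).mp h)
            simp [hx, hxA]
        rw [hc1, hc2] at hsplitlen
        omega
      -- the updated target invariant
      have htar2 : ∀ p, (shellB.foldl (fun t v => (((pvDegNbrAlt T).2).getD v
            PySem.Set.empty).foldl (fun t q => t.insert q v) t) target).get? p =
          Option.map Prod.snd (pvAMax (pvPairs T
            (shellA.foldl (fun d v => d.insert v cent) vcA) p)) := by
        intro p
        rw [pv_target_outer]
        cases hhit : (shellB.filter
            (fun v => decide (p ∈ ((pvDegNbrAlt T).2).getD v PySem.Set.empty))).getLast? with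
        | none =>
          have hnil : shellB.filter
              (fun v => decide (p ∈ ((pvDegNbrAlt T).2).getD v PySem.Set.empty)) = [] :=
            List.getLast?_eq_none_iff.mp hhit
          have hcong : pvPairs T (shellA.foldl (fun d v => d.insert v cent) vcA) p =
              pvPairs T vcA p := by
            unfold pvPairs
            refine List.filterMap_congr ?_
            intro x hx
            have hxs : x ∉ shellA := by
              intro hmem
              have hxB : x ∈ shellB := (hmemAB x).mp hmem
              have hpx : p ∈ ((pvDegNbrAlt T).2).getD x PySem.Set.empty := (hsymB p x).mp hx
              have hne := List.filter_eq_nil_iff.mp hnil x hxB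
              exact hne (by simpa using hpx)
            rw [h1 x, if_neg hxs]
          rw [hcong]
          exact htar p
        | some w =>
          have hpfil : (shellB.filter (fun v =>
              decide (p ∈ ((pvDegNbrAlt T).2).getD v PySem.Set.empty))).Pairwise (· < ·) :=
            hshBsorted.filter _
          obtain ⟨hwmem, hwmax⟩ := pv_getLast?_max _ hpfil w hhit
          obtain ⟨hwB, hwadj⟩ := List.mem_filter.mp hwmem
          have hwadj' : p ∈ ((pvDegNbrAlt T).2).getD w PySem.Set.empty := by simpa using hwadj
          have hwA : w ∈ shellA := (hmemAB w).mpr hwB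
          have hmax : pvAMax (pvPairs T (shellA.foldl (fun d v => d.insert v cent) vcA) p) =
              some (cent, w) := by
            refine pv_aMax_eq_of_max _ _ ?_ ?_
            · unfold pvPairs
              refine List.mem_filterMap.mpr ⟨w, (hsymB w p).mp hwadj', ?_⟩
              rw [h1 w, if_pos hwA]
              rfl
            · rintro y hy
              unfold pvPairs at hy
              obtain ⟨x, hxN, hxf⟩ := List.mem_filterMap.mp hy
              rw [h1 x] at hxf
              by_cases hxA : x ∈ shellA
              · rw [if_pos hxA] at hxf
                obtain rfl : y = (cent, x) := by simpa using hxf.symm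
                have hxhit : x ∈ shellB.filter (fun v =>
                    decide (p ∈ ((pvDegNbrAlt T).2).getD v PySem.Set.empty)) :=
                  List.mem_filter.mpr ⟨(hmemAB x).mp hxA,
                    by simpa using (hsymB p x).mp hxN⟩
                have hle := hwmax x hxhit
                unfold pvLexLt
                simp only [not_or, not_and, not_lt]
                omega
              · rw [if_neg hxA] at hxf
                cases hg : vcA.get? x with
                | none => rw [hg] at hxf; simp at hxf
                | some c =>
                  rw [hg] at hxf
                  obtain rfl : y = (c, x) := by simpa using hxf.symm
                  have hmemit : (x, c) ∈ vcA.items :=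
                    PySem.Dict.mem_items_of_get?_eq_some vcA hg
                  have hc := hbound _ hmemit
                  unfold pvLexLt
                  simp only [not_or, not_and, not_lt]
                  omega
          rw [hmax]
          rfl
      -- memberships of the two next shells agree
      have hshell2 : PySem.List.sorted
            (((shellB.foldl (fun s v => (((pvDegNbrAlt T).2).getD v PySem.Set.empty).foldl
                (fun s q => PySem.Set.add s q) s) PySem.Set.empty)).filter
              (fun p => !(PySem.Set.contains (PySem.Set.update asg shellB) p) &&
                decide ((shellB.foldl (fun r v => (((pvDegNbrAlt T).2).getD v
                  PySem.Set.empty).foldl (fun r q => r.modify q 0 (fun n => n - 1)) r)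
                    rdeg).getD p 0 < 2)))
            (fun v => v) false =
          PySem.List.sorted ((shellA.foldl (fun s v =>
            (pvNbrs T |>.getD v PySem.Set.empty).foldl
              (fun s adj => if !(shellA.foldl (fun d v => d.insert v cent) vcA).contains adj
                then PySem.Set.add s adj else s) s) PySem.Set.empty).foldl
          (fun s p => if (pvNbrs T |>.getD p PySem.Set.empty).foldl
                (fun n a => if !(shellA.foldl (fun d v => d.insert v cent) vcA).contains a
                  then n + 1 else n) (0 : Int) < 2
              then PySem.Set.add s p else s) PySem.Set.empty) (fun v => v) false := by
        refine PySem.List.sorted_eq_sorted_of_perm _ _ _ (fun a b h => h) ?_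
        have hndB : ((shellB.foldl (fun s v => (((pvDegNbrAlt T).2).getD v
            PySem.Set.empty).foldl (fun s q => PySem.Set.add s q) s) PySem.Set.empty).filter
              (fun p => !(PySem.Set.contains (PySem.Set.update asg shellB) p) &&
                decide ((shellB.foldl (fun r v => (((pvDegNbrAlt T).2).getD v
                  PySem.Set.empty).foldl (fun r q => r.modify q 0 (fun n => n - 1)) r)
                    rdeg).getD p 0 < 2))).Nodup := by
          refine List.Nodup.filter _ (pv_touched_nodup _ _ _ ?_)
          simp [PySem.Set.empty]
        refine (List.perm_ext_iff_of_nodup hndB hnd2A).mpr ?_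
        intro y
        rw [List.mem_filter, pv_touched_mem, hmem2A y]
        have hb1 : (PySem.Set.contains (PySem.Set.update asg shellB) y = false) ↔
            ((shellA.foldl (fun d v => d.insert v cent) vcA).contains y = false) := by
          rw [hcont2 y]
          constructor
          · intro h
            have hy : y ∉ PySem.Set.update asg shellB := by
              intro hmem
              rw [(PySem.Set.contains_iff _ y).mpr hmem] at h
              exact Bool.true_eq_false.mp h
            rw [PySem.Set.mem_update] at hy
            push Not at hy
            obtain ⟨hy1, hy2⟩ := hy
            have hva : vcA.contains y = false := by
              rw [← Bool.not_eq_true]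
              intro hc
              exact hy1 ((hasg y).mpr hc)
            have hyA : y ∉ shellA := fun hmem => hy2 ((hmemAB y).mp hmem)
            simp [hva, hyA]
          · intro h
            rcases Bool.or_eq_false_iff.mp h with ⟨hs, hv⟩
            rw [← Bool.not_eq_true]
            intro hc
            have := (PySem.Set.contains_iff _ y).mp hc
            rw [PySem.Set.mem_update] at this
            rcases this with hmem | hmem
            · rw [(hasg y).mp hmem] at hv
              exact Bool.true_eq_false.mp hv
            · rw [decide_eq_true ((hmemAB y).mpr hmem)] at hs
              exact Bool.true_eq_false.mp hs
        have hb2 : ((shellB.foldl (fun r v => (((pvDegNbrAlt T).2).getD v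
              PySem.Set.empty).foldl (fun r q => r.modify q 0 (fun n => n - 1)) r)
                rdeg).getD y 0 < 2) ↔
            ((pvNbrs T |>.getD y PySem.Set.empty).foldl
              (fun n a => if !(shellA.foldl (fun d v => d.insert v cent) vcA).contains a
                then n + 1 else n) (0 : Int) < 2) := by
          rw [hrdeg2 y, pv_cntA]
          have hperm : ((pvNbrs T).getD y PySem.Set.empty).Perm
              (((pvDegNbrAlt T).2).getD y PySem.Set.empty) := by
            refine (List.perm_ext_iff_of_nodup ((hNB y).1).1 (hNBnd y)).mpr ?_
            intro x
            exact (hmemN y x).symm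
          rw [(hperm.filter _).length_eq]
        constructor
        · rintro ⟨hmem, hcond⟩
          simp only [PySem.Set.empty, List.not_mem_nil, false_or] at hmem
          obtain ⟨v, hv, hyv⟩ := hmem
          rcases Bool.and_eq_true_iff.mp hcond with ⟨hc1, hc2⟩
          refine ⟨⟨v, (hmemAB v).mpr hv, (hmemN v y).mp hyv, ?_⟩, ?_⟩
          · exact hb1.mp (by simpa using hc1)
          · exact hb2.mp (by simpa using hc2)
        · rintro ⟨⟨v, hv, hyv, hcf⟩, hcnt⟩
          refine ⟨?_, ?_⟩
          · simp only [PySem.Set.empty, List.not_mem_nil, false_or]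
            exact ⟨v, (hmemAB v).mp hv, (hmemN v y).mpr hyv⟩
          · rw [Bool.and_eq_true_iff]
            refine ⟨by simpa using hb1.mpr hcf, by simpa using hb2.mpr hcnt⟩
      -- carry the old order bookkeeping
      have hsortNodup : (PySem.List.sorted shellA (fun v => v) false).Nodup :=
        (PySem.List.sorted_perm shellA (fun v => v) false).nodup_iff.mpr hshA
      have h5 : ∀ v ∈ ((shellA.foldl (fun s v =>
            (pvNbrs T |>.getD v PySem.Set.empty).foldl
              (fun s adj => if !(shellA.foldl (fun d v => d.insert v cent) vcA).contains adj
                then PySem.Set.add s adj else s) s) PySem.Set.empty).foldl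
          (fun s p => if (pvNbrs T |>.getD p PySem.Set.empty).foldl
                (fun n a => if !(shellA.foldl (fun d v => d.insert v cent) vcA).contains a
                  then n + 1 else n) (0 : Int) < 2
              then PySem.Set.add s p else s) PySem.Set.empty),
          (shellA.foldl (fun d v => d.insert v cent) vcA).contains v = false := by
        intro v hv
        obtain ⟨⟨w, hw, hy, hc⟩, -⟩ := (hmem2A v).mp hv
        exact hc
      have h6 : ∀ q ∈ (shellA.foldl (fun d v => d.insert v cent) vcA).items,
          q.2 < cent + 1 := by
        intro q hq
        rw [hitems2] at hq
        rcases List.mem_append.mp hq with h | h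
        · exact lt_trans (hbound q h) (lt_add_one cent)
        · rcases List.mem_map.mp h with ⟨v, _, rfl⟩
          exact lt_add_one cent
      have h7 : order ++ shellB =
          (L ++ (PySem.List.sorted shellA (fun v => v) false).map (fun v => (cent, v))).map
            (fun q => q.2) := by
        rw [List.map_append, ← hord, List.map_map, hshB]
        congr 1
        simp
      have h8 : (L ++ (PySem.List.sorted shellA (fun v => v) false).map
            (fun v => (cent, v))).Perm
          ((shellA.foldl (fun d v => d.insert v cent) vcA).items.map (fun q => (q.2, q.1))) := by
        rw [hitems2, List.map_append, List.map_map]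
        refine hLp.append ?_
        have hp : ((PySem.List.sorted shellA (fun v => v) false).map
            (fun v => ((cent : Int), v))).Perm (shellA.map (fun v => (cent, v))) :=
          (PySem.List.sorted_perm shellA (fun v => v) false).map _
        refine hp.trans ?_
        rw [show ((fun (q : Int × Int) => (q.2, q.1)) ∘ fun v => (v, cent)) =
          (fun v => ((cent : Int), v)) from rfl]
      have h9 : (L ++ (PySem.List.sorted shellA (fun v => v) false).map
            (fun v => (cent, v))).Pairwise pvLexLt := by
        refine List.pairwise_append.mpr ⟨hLw, ?_, ?_⟩
        · refine List.pairwise_map.mpr ?_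
          have hlt : (PySem.List.sorted shellA (fun v => v) false).Pairwise
              (fun a b => a < b) :=
            pv_pairwise_lt_of_le (PySem.List.sorted_pairwise shellA (fun v => v)) hsortNodup
          exact hlt.imp (fun h => Or.inr ⟨rfl, h⟩)
        · intro a ha b hb
          rcases List.mem_map.mp hb with ⟨v, _, rfl⟩
          rcases List.mem_map.mp (hLp.subset ha) with ⟨q, hq, rfl⟩
          exact Or.inl (hbound q hq)
      have hasg2 : ∀ x, x ∈ PySem.Set.update asg shellB ↔
          (shellA.foldl (fun d v => d.insert v cent) vcA).contains x = true := by
        intro x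
        rw [PySem.Set.mem_update, hcont2 x, hasg x]
        constructor
        · rintro (h | h)
          · simp [h]
          · simp [(hmemAB x).mpr h]
        · intro h
          rcases Bool.or_eq_true_iff.mp h with h | h
          · exact Or.inr ((hmemAB x).mp (by simpa using h))
          · exact Or.inl h
      have hasgnd2 : (PySem.Set.update asg shellB).Nodup := PySem.Set.nodup_update _ _ hasgnd
      -- components of the stamping fold
      have hc1 : (shellB.foldl (pvStampB ((pvDegNbrAlt T).2)) (target, rdeg,
          (PySem.Set.empty : PySem.Set Int))).1 =
          shellB.foldl (fun t v => (((pvDegNbrAlt T).2).getD v PySem.Set.empty).foldl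
            (fun t q => t.insert q v) t) target := by rw [hsplit]
      have hc2 : (shellB.foldl (pvStampB ((pvDegNbrAlt T).2)) (target, rdeg,
          (PySem.Set.empty : PySem.Set Int))).2.1 =
          shellB.foldl (fun r v => (((pvDegNbrAlt T).2).getD v PySem.Set.empty).foldl
            (fun r q => r.modify q 0 (fun n => n - 1)) r) rdeg := by rw [hsplit]
      have hc3 : (shellB.foldl (pvStampB ((pvDegNbrAlt T).2)) (target, rdeg,
          (PySem.Set.empty : PySem.Set Int))).2.2 =
          shellB.foldl (fun s v => (((pvDegNbrAlt T).2).getD v PySem.Set.empty).foldl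
            (fun s q => PySem.Set.add s q) s) PySem.Set.empty := by rw [hsplit]
      simp only [pvCentLoop, pvPeelB, if_neg hA0, if_neg hB0]
      rw [hc1, hc2, hc3, hshell2]
      exact ih _ (cent + 1) _ _ _ _ _ _ _ hknd2 hnd2A rfl h5 h6 h7 h8 h9 hasg2 hasgnd2
        hrdeg2 htar2

theorem pv_loopA_knd (T : List (Int × Int)) :
    ∀ (fuel : Nat) (vc : PySem.Dict Int Int) (cent : Int) (shell : PySem.Set Int),
      vc.keys.Nodup → (pvCentLoop (pvNbrs T) fuel vc cent shell).keys.Nodup := by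
  intro fuel
  induction fuel with
  | zero => intro vc cent shell h; exact h
  | succ fuel ih =>
    intro vc cent shell h
    by_cases h0 : shell = []
    · simp only [pvCentLoop, if_pos h0]
      exact h
    · simp only [pvCentLoop, if_neg h0]
      exact ih _ _ _ (PySem.Dict.nodup_keys_foldl_insert shell (fun _ _ => cent) vc h)

theorem pv_main (T : List (Int × Int)) (hpre : Pre_T_to_outside_in_edges T) :
    T_to_outside_in_edges T = T_to_outside_in_edges_alt T := by
  obtain ⟨hord, htarF⟩ := pv_loop2 T (2 * T.length + 1) PySem.Dict.empty 0
    (PySem.Set.ofList (pvLeaves T)) PySem.Set.empty [] PySem.Dict.empty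
    (((pvDegNbrAlt T).2).items.foldl
      (fun d q => d.insert q.1 (PySem.Set.len q.2)) PySem.Dict.empty)
    (PySem.List.sorted ((pvDegNbrAlt T).1.keys.filter
      (fun v => (pvDegNbrAlt T).1.getD v 0 == 1)) (fun v => v) false)
    []
    PySem.Dict.nodup_keys_empty
    (PySem.Set.nodup_ofList _)
    (by
      rw [PySem.Set.ofList_eq_self_of_nodup _ (pv_nodup_leaves T)]
      rw [← pv_leaves_eq]
      show _ = PySem.List.sorted (PySem.List.sorted _ _ false) _ false
      rw [show pvLeaves T = PySem.List.sorted
        (((pvDeg T).items.filter (fun q => q.2 == 1)).map (fun q => q.1)) (fun v => v) false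
        from rfl]
      rw [PySem.List.sorted_sorted])
    (fun v _ => PySem.Dict.contains_empty v)
    (by simp [PySem.Dict.empty])
    rfl
    (by simp [PySem.Dict.empty])
    List.Pairwise.nil
    (by
      intro x
      simp [PySem.Set.empty, PySem.Dict.contains_empty])
    List.nodup_nil
    (by
      intro p
      rw [pv_rdeg_init T p]
      have hfl : (((pvDegNbrAlt T).2).getD p PySem.Set.empty).filter
          (fun x => !(PySem.Dict.empty : PySem.Dict Int Int).contains x) =
          ((pvDegNbrAlt T).2).getD p PySem.Set.empty := by
        rw [List.filter_eq_self]
        intro x _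
        simp [PySem.Dict.contains_empty]
      rw [hfl])
    (by
      intro p
      simp [pvPairs, PySem.Dict.get?_empty, pvAMax])
  rw [← pv_cent_eq] at htarF
  have hordF : (pvPeelB ((pvDegNbrAlt T).2) (2 * T.length + 1) PySem.Set.empty []
      PySem.Dict.empty
      (((pvDegNbrAlt T).2).items.foldl
        (fun d q => d.insert q.1 (PySem.Set.len q.2)) PySem.Dict.empty)
      (PySem.List.sorted ((pvDegNbrAlt T).1.keys.filter
        (fun v => (pvDegNbrAlt T).1.getD v 0 == 1)) (fun v => v) false)).1 =
      pvOutsideIn T := hord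
  have hknF : (pvCent T).keys.Nodup :=
    pv_loopA_knd T _ _ _ _ PySem.Dict.nodup_keys_empty
  have hall := pv_hall T hpre
  -- the emission loops
  simp only [T_to_outside_in_edges, T_to_outside_in_edges_alt]
  rw [hordF]
  rw [PySem.List.slice_to_neg_one]
  refine PySem.List.foldl_congr_mem _ _ _ _ ?_
  intro edges v hv
  have hvmem : v ∈ pvOutsideIn T := List.dropLast_subset _ hv
  -- v is assigned
  have hvcon : (pvCent T).contains v = true := by
    unfold pvOutsideIn at hvmem
    obtain ⟨r, hr, hrv⟩ := List.mem_map.mp hvmem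
    have hr2 : r ∈ ((pvCent T).items.map (fun q => (q.2, q.1))) :=
      (PySem.List.sorted2_perm _ _ _ _).subset hr
    obtain ⟨q, hq, hqr⟩ := List.mem_map.mp hr2
    have hget : (pvCent T).get? q.1 = some q.2 :=
      PySem.Dict.get?_of_mem_items _ hq hknF
    have hq1 : q.1 = v := by
      rw [← hqr] at hrv
      simpa using hrv
    rw [hq1] at hget
    rw [PySem.Dict.contains_eq_isSome_get?, hget]
    rfl
  -- every neighbor of v is assigned, so the filterMap is a full map
  have hpairs : pvPairs T (pvCent T) v =
      (((pvDegNbrAlt T).2).getD v PySem.Set.empty).map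
        (fun x => ((pvCent T).getD x 0, x)) := by
    unfold pvPairs
    have hstep : ∀ x ∈ ((pvDegNbrAlt T).2).getD v PySem.Set.empty,
        ((pvCent T).get? x).map (fun c => (c, x)) =
          (fun x => some (((pvCent T).getD x 0, x))) x := by
      intro x hx
      have hxA : x ∈ (pvNbrs T).getD v PySem.Set.empty := ((pv_nbr_rel T v).2 x).mpr hx
      have hxc : (pvCent T).contains x = true := hall v x hvcon hxA
      rw [pv_get?_eq_ite _ x 0, if_pos hxc]
      rfl
    rw [List.filterMap_congr hstep]
    rw [show (fun x => some (((pvCent T).getD x 0, x))) =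
      some ∘ (fun x => ((pvCent T).getD x 0, x)) from rfl]
    rw [List.filterMap_eq_map]
  -- A's max2? equals the running lexicographic maximum over the same pairs
  have hAeq : PySem.List.max2? (((pvNbrs T).getD v PySem.Set.empty).map
        (fun x => ((pvCent T).getD x 0, x))) (fun r => r.1) (fun r => r.2) =
      pvAMax (pvPairs T (pvCent T) v) := by
    rw [hpairs]
    unfold pvAMax
    rw [List.foldl_map]
    unfold PySem.List.max2?
    refine pv_scan_eq _ _ (fun x => ((pvCent T).getD x 0, x)) _ _
      (fun x => rfl)
      (fun b x h => by
        have hc : (decide (b.1 < x.1) || (!decide (x.1 < b.1) && decide (b.2 < x.2))) = true := by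
          unfold pvLexLt at h
          simp only [Bool.or_eq_true, Bool.and_eq_true, Bool.not_eq_true', decide_eq_true_eq,
            decide_eq_false_iff_not]
          omega
        simp [hc])
      (fun b x h => by
        have hc : ¬ ((decide (b.1 < x.1) || (!decide (x.1 < b.1) && decide (b.2 < x.2))) = true) := by
          unfold pvLexLt at h
          simp only [Bool.or_eq_true, Bool.and_eq_true, Bool.not_eq_true', decide_eq_true_eq,
            decide_eq_false_iff_not]
          omega
        simp [hc])
      (fun u => rfl)
      (fun b u h => pv_aMax_step_lt b _ h)
      (fun b u h => pv_aMax_step_ge b _ h)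
      (fun y => by
        rw [List.mem_map, List.mem_map]
        constructor
        · rintro ⟨u, hu, rfl⟩
          exact ⟨u, ((pv_nbr_rel T v).2 u).mp hu, rfl⟩
        · rintro ⟨u, hu, rfl⟩
          exact ⟨u, ((pv_nbr_rel T v).2 u).mpr hu, rfl⟩)
  rw [hAeq, htarF v]
  cases pvAMax (pvPairs T (pvCent T) v) with
  | none => rfl
  | some m => rfl

-- ===== VERDICT (by name: the statement is the Claim_ definition above) =====
theorem T_to_outside_in_edges_spec : Claim_equal_T_to_outside_in_edges := by
  intro T _ hpre
  unfold Spec_T_to_outside_in_edges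
  exact pv_main T hpre
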